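-- pv_equiv track=rewrite | github.com/sealinglip/leecode | 2603.收集树中金币.py | collectTheCoins
-- ===== SOURCE A (Python) =====
-- from collections import defaultdict, deque
-- from typing import List
--
-- def collectTheCoins(coins: List[int], edges: List[List[int]]) -> int:
--     # 构建关系
--     n = len(coins)
--     graph = defaultdict(list)  # 记录每个点能连到的点
--     cnt = [0] * n  # 记录每个点上的边数
--     for u, v in edges:
--         graph[u].append(v)
--         cnt[u] += 1
--         graph[v].append(u)
--         cnt[v] += 1
--
--     # 定义最外层为边数为1的点
--     # 先去掉最外层点钟coins为零的
--     valueless = deque(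
--         [i for i in range(n) if cnt[i] == 1 and coins[i] == 0])
--     while valueless:
--         i = valueless.popleft()
--         cnt[i] = 0  # 从图中删除该节点
--         # 跟它相连的节点cnt减一
--         for j in graph[i]:
--             if cnt[j] > 0:
--                 cnt[j] -= 1
--                 if cnt[j] == 1 and coins[j] == 0:
--                     valueless.append(j)
--
--     # 剩下的节点中，再去掉两层
--     for j in range(2):
--         leaves = [i for i in range(n) if cnt[i] == 1]
--         for i in leaves:
--             cnt[i] = 0  # 从图中删除该节点
--             # 跟它相连的节点cnt减一
--             for k in graph[i]:
--                 if cnt[k] > 0: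
--                     cnt[k] -= 1
--
--     # 剩下的节点都要走到，就看最少步数遍历了——好像怎么走都是 (点数-1)*2
--     left = (n - cnt.count(0))
--     return max((left - 1) << 1, 0)
-- ===== SOURCE B (Python) =====
-- def collectTheCoins(coins, edges):
--     # Global-fixpoint formulation: no queue, no adjacency lists, no counter updates.
--     # Repeatedly recompute, by a single scan of the EDGE LIST, the live degree of
--     # every node inside the current candidate set, and shrink the set simultaneously:
--     # phase 1 keeps the greatest set whose members have degree>=1 and (a coin or
--     # degree>=2); then two rounds each drop the leaves and any node left isolated.
--     n = len(coins)
--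
--     def deg(alive):
--         d = [0] * n
--         for u, v in edges:
--             if alive[v]:
--                 d[u] += 1
--             if alive[u]:
--                 d[v] += 1
--         return d
--
--     alive = [True] * n
--     for _ in range(n + 1):
--         d = deg(alive)
--         alive = [alive[i] and d[i] > 0 and (coins[i] != 0 or d[i] > 1)
--                  for i in range(n)]
--     for _ in range(2):
--         d = deg(alive)
--         alive = [alive[i] and d[i] > 1 for i in range(n)]
--         d = deg(alive)
--         alive = [alive[i] and d[i] > 0 for i in range(n)]
--     k = sum(alive)
--     return max(2 * (k - 1), 0)
-- ===== Notes on version B (the rewrite author's own statement) =====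
-- stated objective: alternative
-- what changed: B drops A's queue/adjacency-list/counter machinery entirely: it keeps one boolean candidate set and repeatedly shrinks it simultaneously (a greatest-fixpoint iteration), recomputing live degrees each pass by a single scan of the raw edge list; the coinless peel becomes n+1 synchronous pruning sweeps instead of a BFS queue with decrement propagation, and the two extra layers become drop-leaves-then-drop-isolated sweeps.
-- outside the precondition, e.g. on collectTheCoins([1, 1, 1, 0], [[-2, 2], [-1, 2], [0, 2], [0, -3]]): A returns 2, B returns 0; on collectTheCoins([0, 0], [[0, 1], [0, 1]]): A returns 2, B returns 2; on collectTheCoins([1, 1], [[0, 0], [0, 1]]): A returns 0, B returns 0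
import Mathlib
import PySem

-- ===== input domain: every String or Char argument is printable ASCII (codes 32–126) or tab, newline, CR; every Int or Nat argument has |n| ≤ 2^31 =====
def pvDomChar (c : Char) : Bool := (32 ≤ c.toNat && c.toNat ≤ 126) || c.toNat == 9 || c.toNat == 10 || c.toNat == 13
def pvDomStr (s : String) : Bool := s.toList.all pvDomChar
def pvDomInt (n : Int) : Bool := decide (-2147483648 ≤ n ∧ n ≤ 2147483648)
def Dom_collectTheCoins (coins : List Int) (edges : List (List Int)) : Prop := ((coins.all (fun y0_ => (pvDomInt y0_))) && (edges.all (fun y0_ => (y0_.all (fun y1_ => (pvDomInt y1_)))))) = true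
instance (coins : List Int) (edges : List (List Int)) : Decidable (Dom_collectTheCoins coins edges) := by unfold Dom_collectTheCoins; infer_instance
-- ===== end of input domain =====

-- B replaces A's BFS queue / adjacency-list / decrementing-counter machinery by a
-- synchronous greatest-fixpoint iteration on one boolean candidate set, recomputing
-- live degrees from the raw edge list each sweep; objective: alternative (not faster).

-- ===== PORT A =====

-- Python list write xs[i] = v (index may be negative: wraps); out-of-range raises
-- IndexError in Python — that branch returns xs unchanged and is unreachable under Pre_.
def pySet {α : Type} (xs : List α) (i : Int) (v : α) : List α :=
  let k : Int := if i < 0 then i + xs.length else i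
  if 0 ≤ k ∧ k < (xs.length : Int) then xs.set k.toNat v else xs

-- Python read xs[i] (int list); out-of-range raises in Python — default 0 unreachable under Pre_.
def getI (xs : List Int) (i : Int) : Int := PySem.List.pyGetD xs i 0

-- A's 'while valueless:' BFS peel. Fuel: each iteration pops one queue element and each
-- node is enqueued at most once, so at most n + |initial queue| ≤ 2n iterations happen;
-- the fuel 2n+1 passed by collectTheCoins is never exhausted (it only makes the loop total).
def collectA_loop (graph : PySem.Dict Int (List Int)) (coins : List Int) :
    Nat → List Int → List Int → List Int
  | 0, cnt, _ => cnt
  | _ + 1, cnt, [] => cnt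
  | fuel + 1, cnt, i :: rest =>
      let cnt1 := pySet cnt i 0
      let s := (graph.getD i []).foldl (fun s j =>
          if getI s.1 j > 0 then
            let c := pySet s.1 j (getI s.1 j - 1)
            if getI c j == 1 && getI coins j == 0 then (c, s.2 ++ [j]) else (c, s.2)
          else s) (cnt1, rest)
      collectA_loop graph coins fuel s.1 s.2

-- one iteration of A's 'for j in range(2):' layer-stripping loop
def collectA_round (graph : PySem.Dict Int (List Int)) (n : Nat) (cnt : List Int) : List Int :=
  let leaves := (PySem.List.pyRange 0 n 1).filter (fun i => getI cnt i == 1)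
  leaves.foldl (fun cnt i =>
    let cnt1 := pySet cnt i 0
    (graph.getD i []).foldl (fun c k => if getI c k > 0 then pySet c k (getI c k - 1) else c) cnt1) cnt

def collectTheCoins (coins : List Int) (edges : List (List Int)) : Int :=
  let n := coins.length
  -- for u, v in edges: graph[u].append(v); cnt[u] += 1; graph[v].append(u); cnt[v] += 1
  -- (an edge that is not a 2-element list raises ValueError; unreachable under Pre_)
  let gc := edges.foldl (fun gc e =>
      match e with
      | [u, v] =>
          let g1 := gc.1.modify u [] (· ++ [v])
          let c1 := pySet gc.2 u (getI gc.2 u + 1)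
          let g2 := g1.modify v [] (· ++ [u])
          let c2 := pySet c1 v (getI c1 v + 1)
          (g2, c2)
      | _ => gc)
    ((PySem.Dict.empty : PySem.Dict Int (List Int)), List.replicate n (0 : Int))
  let graph := gc.1
  let cnt0 := gc.2
  let q0 := (PySem.List.pyRange 0 n 1).filter (fun i => getI cnt0 i == 1 && getI coins i == 0)
  let cnt1 := collectA_loop graph coins (2 * n + 1) cnt0 q0
  let cnt3 := (PySem.List.pyRange 0 2 1).foldl (fun c _ => collectA_round graph n c) cnt1
  let left : Int := (n : Int) - (PySem.List.count cnt3 0 : Int)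
  max ((left - 1) <<< (1 : Nat)) 0

-- ===== PORT B =====

-- B-side read/write primitives (Python indexing; out-of-range unreachable under Pre_)
def bGetB (xs : List Bool) (i : Int) : Bool := PySem.List.pyGetD xs i false
def bGetI (xs : List Int) (i : Int) : Int := PySem.List.pyGetD xs i 0
def bSetI (xs : List Int) (i : Int) (v : Int) : List Int :=
  let k : Int := if i < 0 then i + xs.length else i
  if 0 ≤ k ∧ k < (xs.length : Int) then xs.set k.toNat v else xs

-- Source B's deg(alive): one scan of the raw edge list
def bDeg (n : Nat) (edges : List (List Int)) (alive : List Bool) : List Int :=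
  edges.foldl (fun d e =>
    if e.length = 2 then
      let u := bGetI e 0
      let v := bGetI e 1
      let d1 := if bGetB alive v then bSetI d u (bGetI d u + 1) else d
      if bGetB alive u then bSetI d1 v (bGetI d1 v + 1) else d1
    else d) (List.replicate n (0 : Int))

-- one synchronous pruning sweep of phase 1 (the list comprehension in Source B)
def bStep (coins : List Int) (edges : List (List Int)) (alive : List Bool) : List Bool :=
  let n := coins.length
  let d := bDeg n edges alive
  (PySem.List.pyRange 0 n 1).map (fun i =>
    bGetB alive i && decide (0 < bGetI d i) &&
      (!(bGetI coins i == 0) || decide (1 < bGetI d i)))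

-- one of the two final rounds: drop leaves, then drop nodes left isolated
def bRound (coins : List Int) (edges : List (List Int)) (alive : List Bool) : List Bool :=
  let n := coins.length
  let d := bDeg n edges alive
  let alive2 := (PySem.List.pyRange 0 n 1).map (fun i => bGetB alive i && decide (1 < bGetI d i))
  let d2 := bDeg n edges alive2
  (PySem.List.pyRange 0 n 1).map (fun i => bGetB alive2 i && decide (0 < bGetI d2 i))

def collectTheCoins_alt (coins : List Int) (edges : List (List Int)) : Int :=
  let n := coins.length
  let alive1 := (PySem.List.pyRange 0 ((n : Int) + 1) 1).foldl
      (fun a _ => bStep coins edges a) (List.replicate n true)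
  let alive3 := (PySem.List.pyRange 0 2 1).foldl (fun a _ => bRound coins edges a) alive1
  max (2 * ((alive3.countP (fun b => b) : Int) - 1)) 0

-- ===== PRECONDITION & SPEC =====

def edgeOK (n : Int) (e : List Int) : Bool :=
  decide (e.length = 2) && e.all (fun x => decide (0 ≤ x) && decide (x < n))
    && decide (e.getD 0 0 ≠ e.getD 1 0)

-- Pre_ restricts to the problem's natural domain: node labels 0..n-1 and a simple edge
-- list (no self-loops, no repeated unordered pair). Outside it A raises (bad edge shape,
-- labels ≥ n or < -n) except that A still returns via Python's negative-index wraparound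
-- or with duplicate-edge/self-loop multigraph bookkeeping, which this claim does not cover.
def Pre_collectTheCoins (coins : List Int) (edges : List (List Int)) : Prop :=
  (∀ e ∈ edges, edgeOK (coins.length : Int) e = true) ∧
  edges.Pairwise (fun e f => e ≠ f ∧ e ≠ f.reverse)

instance (coins : List Int) (edges : List (List Int)) : Decidable (Pre_collectTheCoins coins edges) := by
  unfold Pre_collectTheCoins; infer_instance

def pvWitness_collectTheCoins : List Int × List (List Int) :=
  ([1, 0, 0, 1, 0], [[0, 1], [1, 2], [2, 3], [1, 4]])

def Spec_collectTheCoins (coins : List Int) (edges : List (List Int)) (out : Int) : Prop := out = collectTheCoins_alt coins edges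
instance (coins : List Int) (edges : List (List Int)) (out : Int) : Decidable (Spec_collectTheCoins coins edges out) := by unfold Spec_collectTheCoins; infer_instance

-- ===== CLAIM (what is proved, stated in full; the proofs are below) =====
def Claim_equal_collectTheCoins : Prop := ∀ (coins : List Int) (edges : List (List Int)), Dom_collectTheCoins coins edges → Pre_collectTheCoins coins edges → Spec_collectTheCoins coins edges (collectTheCoins coins edges)

-- ===== LEMMAS AND PROOFS =====

-- proof-side read of a removed[]/alive[] flag (definitionally B's bGetB)
def getB (xs : List Bool) (i : Int) : Bool := PySem.List.pyGetD xs i false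

-- basic pySet / getI / getB lemmas (all uses have 0 ≤ i < length)
theorem pySet_of_nonneg {α : Type} (xs : List α) (i : Int) (v : α)
    (h0 : 0 ≤ i) (h1 : i < (xs.length : Int)) :
    pySet xs i v = xs.set i.toNat v := by
  simp only [pySet]
  rw [if_neg (show ¬ i < 0 by omega)]
  rw [if_pos ⟨h0, h1⟩]

theorem length_pySet {α : Type} (xs : List α) (i : Int) (v : α) :
    (pySet xs i v).length = xs.length := by
  simp only [pySet]
  split <;> (split <;> simp)

theorem pyGetD_pySet_self {α : Type} (xs : List α) (i : Int) (v d : α)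
    (h0 : 0 ≤ i) (h1 : i < (xs.length : Int)) :
    PySem.List.pyGetD (pySet xs i v) i d = v := by
  rw [pySet_of_nonneg xs i v h0 h1]
  rw [PySem.List.pyGetD_of_nonneg _ _ h0]
  rw [List.getD_eq_getElem?_getD]
  rw [List.getElem?_set_self (by omega)]
  simp

theorem pyGetD_pySet_ne {α : Type} (xs : List α) (i k : Int) (v d : α)
    (hi0 : 0 ≤ i) (hi1 : i < (xs.length : Int)) (hk : 0 ≤ k) (hne : k ≠ i) :
    PySem.List.pyGetD (pySet xs i v) k d = PySem.List.pyGetD xs k d := by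
  rw [pySet_of_nonneg xs i v hi0 hi1]
  rw [PySem.List.pyGetD_of_nonneg _ _ hk, PySem.List.pyGetD_of_nonneg _ _ hk]
  rw [List.getD_eq_getElem?_getD, List.getD_eq_getElem?_getD]
  rw [List.getElem?_set_ne (by omega)]

-- ---- graph abstraction: the directed pair list of an edge list ----
def dirs (edges : List (List Int)) : List (Int × Int) :=
  edges.flatMap (fun e => match e with | [u, v] => [(u, v), (v, u)] | _ => [])

def buildDict (edges : List (List Int)) : PySem.Dict Int (List Int) :=
  edges.foldl (fun d e =>
      match e with
      | [u, v] => (d.modify u [] (· ++ [v])).modify v [] (· ++ [u])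
      | _ => d) (PySem.Dict.empty : PySem.Dict Int (List Int))

theorem buildDict_eq_dirs_fold (edges : List (List Int)) (d : PySem.Dict Int (List Int)) :
    edges.foldl (fun d e =>
      match e with
      | [u, v] => (d.modify u [] (· ++ [v])).modify v [] (· ++ [u])
      | _ => d) d
    = (dirs edges).foldl (fun d p => d.modify p.1 [] (· ++ [p.2])) d := by
  induction edges generalizing d with
  | nil => rfl
  | cons e es ih =>
      match e with
      | [] => simpa [dirs] using ih d
      | [u] => simpa [dirs] using ih _
      | u :: v :: w :: t => simpa [dirs] using ih _
      | [u, v] => simpa [dirs] using ih _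

theorem adj_buildDict (edges : List (List Int)) (i : Int) :
    (buildDict edges).getD i [] =
      ((dirs edges).filter (fun p => p.1 == i)).map (·.2) := by
  unfold buildDict
  rw [buildDict_eq_dirs_fold]
  rw [PySem.Dict.getD_foldl_modify_append]
  simp

theorem mem_dirs {edges : List (List Int)} {a b : Int} :
    (a, b) ∈ dirs edges ↔ ([a, b] ∈ edges ∨ [b, a] ∈ edges) := by
  unfold dirs
  rw [List.mem_flatMap]
  constructor
  · rintro ⟨e, he, hm⟩
    match e with
    | [] => simp at hm
    | [u] => simp at hm
    | u :: v :: w :: t => simp at hm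
    | [u, v] =>
        simp only [List.mem_cons, Prod.mk.injEq] at hm
        rcases hm with ⟨rfl, rfl⟩ | (⟨rfl, rfl⟩ | h)
        · exact Or.inl he
        · exact Or.inr he
        · simp at h
  · rintro (h | h)
    · exact ⟨[a, b], h, by simp⟩
    · exact ⟨[b, a], h, by simp⟩

theorem mem_adj {edges : List (List Int)} {i j : Int} :
    j ∈ (buildDict edges).getD i [] ↔ (i, j) ∈ dirs edges := by
  rw [adj_buildDict]
  simp only [List.mem_map, List.mem_filter]
  constructor
  · rintro ⟨p, ⟨hp, he⟩, rfl⟩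
    have : p.1 = i := by simpa using he
    rw [← this]; exact hp
  · intro h
    exact ⟨(i, j), ⟨h, by simp⟩, rfl⟩

-- ---- facts about dirs under Pre_ ----
theorem dirs_range {coins : List Int} {edges : List (List Int)}
    (hPre : ∀ e ∈ edges, edgeOK (coins.length : Int) e = true) :
    ∀ p ∈ dirs edges, (0 ≤ p.1 ∧ p.1 < (coins.length : Int)) ∧
      (0 ≤ p.2 ∧ p.2 < (coins.length : Int)) ∧ p.1 ≠ p.2 := by
  rintro ⟨a, b⟩ hm
  rcases mem_dirs.1 hm with h | h
  · have := hPre _ h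
    simp [edgeOK] at this
    omega
  · have := hPre _ h
    simp [edgeOK] at this
    omega

theorem dirs_symm {edges : List (List Int)} {a b : Int} :
    (a, b) ∈ dirs edges ↔ (b, a) ∈ dirs edges := by
  rw [mem_dirs, mem_dirs]; tauto

theorem dirs_nodup {coins : List Int} {edges : List (List Int)}
    (hPre1 : ∀ e ∈ edges, edgeOK (coins.length : Int) e = true)
    (hPre2 : edges.Pairwise (fun e f => e ≠ f ∧ e ≠ f.reverse)) :
    (dirs edges).Nodup := by
  induction edges with
  | nil => simp [dirs]
  | cons e es ih =>
      have hPre2' := (List.pairwise_cons.1 hPre2).2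
      have hhd := (List.pairwise_cons.1 hPre2).1
      have he := hPre1 e (by simp)
      match e with
      | [] => simp [edgeOK] at he
      | [u] => simp [edgeOK] at he
      | u :: v :: w :: t => simp [edgeOK] at he
      | [u, v] =>
          have huv : u ≠ v := by simp [edgeOK] at he; omega
          have htail : (dirs es).Nodup := ih (fun f hf => hPre1 f (by simp [hf])) hPre2'
          have hdir : dirs ([u, v] :: es) = [(u, v), (v, u)] ++ dirs es := by simp [dirs]
          rw [hdir]
          apply List.Nodup.append
          · simp [huv]
          · exact htail
          · intro p hp hq
            have hp' : p = (u, v) ∨ p = (v, u) := by simpa using hp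
            rcases hp' with rfl | rfl
            · rcases mem_dirs.1 hq with h | h
              · exact (hhd _ h).1 rfl
              · exact (hhd _ h).2 (by simp)
            · rcases mem_dirs.1 hq with h | h
              · exact (hhd _ h).2 (by simp)
              · exact (hhd _ h).1 rfl

-- ---- GraphOK: what the simple-graph precondition gives about the adjacency dict ----
def GraphOK (n : Nat) (g : PySem.Dict Int (List Int)) : Prop :=
  ∀ i : Int,
    (g.getD i []).Nodup ∧
    (∀ j ∈ g.getD i [], (0 ≤ j ∧ j < (n : Int)) ∧ j ≠ i) ∧
    (∀ j : Int, j ∈ g.getD i [] ↔ i ∈ g.getD j [])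

theorem graphOK_buildDict {coins : List Int} {edges : List (List Int)}
    (hPre : Pre_collectTheCoins coins edges) :
    GraphOK coins.length (buildDict edges) := by
  obtain ⟨h1, h2⟩ := hPre
  intro i
  refine ⟨?_, ?_, ?_⟩
  · rw [adj_buildDict]
    apply List.Nodup.map_on
    · rintro ⟨a, b⟩ hab ⟨c, d⟩ hcd hbd
      simp only [List.mem_filter, beq_iff_eq] at hab hcd
      simp only at hbd
      rw [Prod.mk.injEq]
      exact ⟨hab.2.trans hcd.2.symm, hbd⟩
    · exact (dirs_nodup h1 h2).filter _
  · intro j hj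
    have hm := mem_adj.1 hj
    have := dirs_range h1 _ hm
    simp only at this
    exact ⟨⟨this.2.1.1, this.2.1.2⟩, fun h => this.2.2 (h ▸ rfl)⟩
  · intro j
    rw [mem_adj, mem_adj, dirs_symm]

-- getB/getI wrappers over pySet
theorem getB_pySet_self (xs : List Bool) (i : Int) (v : Bool)
    (h0 : 0 ≤ i) (h1 : i < (xs.length : Int)) : getB (pySet xs i v) i = v := by
  unfold getB; exact pyGetD_pySet_self xs i v false h0 h1

theorem getB_pySet_ne (xs : List Bool) (i k : Int) (v : Bool)
    (hi0 : 0 ≤ i) (hi1 : i < (xs.length : Int)) (hk : 0 ≤ k) (hne : k ≠ i) :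
    getB (pySet xs i v) k = getB xs k := by
  unfold getB; exact pyGetD_pySet_ne xs i k v false hi0 hi1 hk hne

theorem getI_pySet_self (xs : List Int) (i : Int) (v : Int)
    (h0 : 0 ≤ i) (h1 : i < (xs.length : Int)) : getI (pySet xs i v) i = v := by
  unfold getI; exact pyGetD_pySet_self xs i v 0 h0 h1

theorem getI_pySet_ne (xs : List Int) (i k : Int) (v : Int)
    (hi0 : 0 ≤ i) (hi1 : i < (xs.length : Int)) (hk : 0 ≤ k) (hne : k ≠ i) :
    getI (pySet xs i v) k = getI xs k := by
  unfold getI; exact pyGetD_pySet_ne xs i k v 0 hi0 hi1 hk hne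

-- ---- live degree of a node w.r.t. a removed-flag list (proof-side notion) ----
def liveB (adj : PySem.Dict Int (List Int)) (removed : List Bool) (i : Int) : Int :=
  let nbrs := adj.getD i []
  (nbrs.length : Int) - nbrs.foldl (fun s j => s + (if getB removed j then (1 : Int) else 0)) 0

theorem liveB_eq_sub_countP (g : PySem.Dict Int (List Int)) (removed : List Bool) (i : Int) :
    liveB g removed i =
      ((g.getD i []).length : Int) - ((g.getD i []).countP (fun j => getB removed j) : Int) := by
  simp only [liveB]
  rw [PySem.List.foldl_add (g := fun j => if getB removed j then (1 : Int) else 0)]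
  rw [PySem.List.sum_map_ite_one_zero]
  simp

theorem liveB_eq_countP_not (g : PySem.Dict Int (List Int)) (removed : List Bool) (i : Int) :
    liveB g removed i = ((g.getD i []).countP (fun j => !(getB removed j)) : Int) := by
  rw [liveB_eq_sub_countP]
  have h2 : ∀ l : List Int, l.countP (fun j => !(getB removed j)) + l.countP (fun j => getB removed j) = l.length := by
    intro l
    induction l with
    | nil => simp
    | cons a t ih =>
        rw [List.countP_cons, List.countP_cons]
        cases h : getB removed a <;> simp [h] <;> omega
  have := h2 (g.getD i [])
  omega

theorem liveB_nonneg (g : PySem.Dict Int (List Int)) (removed : List Bool) (i : Int) :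
    0 ≤ liveB g removed i := by
  rw [liveB_eq_sub_countP]
  have := List.countP_le_length (l := g.getD i []) (p := fun j => getB removed j)
  omega

theorem liveB_pos (g : PySem.Dict Int (List Int)) (removed : List Bool) {i x : Int}
    (hx : x ∈ g.getD i []) (hrx : getB removed x = false) :
    1 ≤ liveB g removed i := by
  rw [liveB_eq_sub_countP]
  have hlt : (g.getD i []).countP (fun j => getB removed j) < (g.getD i []).length := by
    rw [List.countP_eq_length_filter]
    exact List.length_filter_lt_length_iff_exists.2 ⟨x, hx, by simp [hrx]⟩
  omega

theorem countP_getB_pySet (removed : List Bool) (i : Int) (l : List Int)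
    (hi0 : 0 ≤ i) (hi1 : i < (removed.length : Int))
    (hl : ∀ j ∈ l, 0 ≤ j) (hnd : l.Nodup) (hri : getB removed i = false) :
    (l.countP (fun j => getB (pySet removed i true) j) : Int) =
      (l.countP (fun j => getB removed j) : Int) + (if i ∈ l then 1 else 0) := by
  induction l with
  | nil => simp
  | cons a t ih =>
      have ha := hl a (by simp)
      have iht := ih (fun j hj => hl j (by simp [hj])) hnd.of_cons
      rw [List.countP_cons, List.countP_cons]
      push_cast
      rw [iht]
      by_cases hai : a = i
      · subst hai
        have hnt : a ∉ t := (List.nodup_cons.1 hnd).1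
        simp only [getB_pySet_self removed a true ha hi1, hri]
        simp [hnt]
      · simp only [getB_pySet_ne removed i a true hi0 hi1 ha hai]
        by_cases hit : i ∈ t <;> simp [hit, List.mem_cons] <;> omega

theorem liveB_pySet {n : Nat} {g : PySem.Dict Int (List Int)} (hg : GraphOK n g)
    (removed : List Bool) {i : Int} (x : Int)
    (hi0 : 0 ≤ i) (hi1 : i < (removed.length : Int)) (hri : getB removed i = false) :
    liveB g (pySet removed i true) x =
      liveB g removed x - (if i ∈ g.getD x [] then 1 else 0) := by
  rw [liveB_eq_sub_countP, liveB_eq_sub_countP]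
  rw [countP_getB_pySet removed i (g.getD x []) hi0 hi1
      (fun j hj => ((hg x).2.1 j hj).1.1) (hg x).1 hri]
  ring

-- ---- the invariant tying A's counter array to the proof-side removed flags ----
def CInv (n : Nat) (g : PySem.Dict Int (List Int)) (cnt : List Int) (removed : List Bool) : Prop :=
  cnt.length = n ∧ removed.length = n ∧
  ∀ i : Int, 0 ≤ i → i < (n : Int) →
    getI cnt i = if getB removed i then 0 else liveB g removed i

-- queue well-formedness maintained by the peel loop
def QOK (n : Nat) (g : PySem.Dict Int (List Int)) (removed : List Bool) (q : List Int) : Prop :=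
  q.Nodup ∧ ∀ x ∈ q, (0 ≤ x ∧ x < (n : Int)) ∧ getB removed x = false ∧ liveB g removed x ≤ 1

-- proof-side sequential mirror of A's BFS peel, on removed flags instead of counters
def seqLoop (adj : PySem.Dict Int (List Int)) (coins : List Int) :
    Nat → List Bool → List Int → List Bool
  | 0, removed, _ => removed
  | fuel + 1, removed, q =>
      match q with
      | [] => removed
      | i :: rest =>
          let removed1 := pySet removed i true
          let q' := (adj.getD i []).foldl (fun q j =>
              if !(getB removed1 j) && getI coins j == 0 && liveB adj removed1 j == 1
              then q ++ [j] else q) rest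
          seqLoop adj coins fuel removed1 q'

-- ---- characterization of A's decrement pass over an adjacency list ----
theorem decfold_length (l : List Int) (cnt : List Int) :
    (l.foldl (fun c k => if getI c k > 0 then pySet c k (getI c k - 1) else c) cnt).length
      = cnt.length := by
  induction l generalizing cnt with
  | nil => rfl
  | cons a t ih =>
      simp only [List.foldl_cons]
      split
      · rw [ih, length_pySet]
      · rw [ih]

theorem decfold_char (l : List Int) (cnt : List Int)
    (hnd : l.Nodup) (hm : ∀ j ∈ l, 0 ≤ j ∧ j < (cnt.length : Int)) :
    ∀ k : Int, 0 ≤ k → k < (cnt.length : Int) →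
      getI (l.foldl (fun c k => if getI c k > 0 then pySet c k (getI c k - 1) else c) cnt) k
        = if k ∈ l ∧ getI cnt k > 0 then getI cnt k - 1 else getI cnt k := by
  induction l generalizing cnt with
  | nil => intro k _ _; simp
  | cons a t ih =>
      intro k hk0 hk1
      have ha := hm a (by simp)
      have hat : a ∉ t := (List.nodup_cons.1 hnd).1
      simp only [List.foldl_cons]
      by_cases hpos : getI cnt a > 0
      · rw [if_pos hpos]
        have hlen : (pySet cnt a (getI cnt a - 1)).length = cnt.length := length_pySet _ _ _
        have iht := ih (pySet cnt a (getI cnt a - 1)) hnd.of_cons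
            (by rw [hlen]; exact fun j hj => hm j (by simp [hj])) k hk0 (by rw [hlen]; exact hk1)
        rw [iht]
        by_cases hka : k = a
        · subst hka
          rw [getI_pySet_self cnt k _ hk0 hk1]
          have : ¬ (k ∈ t ∧ getI cnt k - 1 > 0 ∧ True) := by
            intro h; exact hat h.1
          simp [hat, hpos]
        · rw [getI_pySet_ne cnt a k _ ha.1 ha.2 hk0 hka]
          simp [List.mem_cons, hka]
      · rw [if_neg hpos]
        have iht := ih cnt hnd.of_cons (fun j hj => hm j (by simp [hj])) k hk0 hk1
        rw [iht]
        by_cases hka : k = a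
        · subst hka; simp [hat, hpos]
        · simp [List.mem_cons, hka]

theorem removeOne {n : Nat} {g : PySem.Dict Int (List Int)} (hg : GraphOK n g)
    {cnt : List Int} {removed : List Bool} {i : Int}
    (hInv : CInv n g cnt removed) (hi0 : 0 ≤ i) (hi1 : i < (n : Int))
    (hri : getB removed i = false) :
    CInv n g
      ((g.getD i []).foldl (fun c k => if getI c k > 0 then pySet c k (getI c k - 1) else c)
        (pySet cnt i 0))
      (pySet removed i true) := by
  obtain ⟨hlc, hlr, hiv⟩ := hInv
  have hlc' : (pySet cnt i 0).length = cnt.length := length_pySet _ _ _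
  refine ⟨by rw [decfold_length, hlc', hlc], by rw [length_pySet, hlr], ?_⟩
  intro k hk0 hk1
  have hchar := decfold_char (g.getD i []) (pySet cnt i 0) (hg i).1
      (by rw [hlc', hlc]; exact fun j hj => ((hg i).2.1 j hj).1) k hk0 (by rw [hlc', hlc]; exact hk1)
  rw [hchar]
  have hlive := liveB_pySet hg removed k hi0 (by rw [hlr]; exact hi1) hri
  by_cases hki : k = i
  · subst hki
    have hnm : k ∉ g.getD k [] := fun h => ((hg k).2.1 k h).2 rfl
    rw [getB_pySet_self removed k true hk0 (by rw [hlr]; exact hk1)]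
    rw [getI_pySet_self cnt k 0 hk0 (by rw [hlc]; exact hk1)]
    simp [hnm]
  · have hbase : getI (pySet cnt i 0) k = getI cnt k :=
      getI_pySet_ne cnt i k 0 hi0 (by rw [hlc]; exact hi1) hk0 hki
    rw [hbase]
    rw [getB_pySet_ne removed i k true hi0 (by rw [hlr]; exact hi1) hk0 hki]
    have hvk := hiv k hk0 hk1
    by_cases hrk : getB removed k = true
    · rw [if_pos hrk] at hvk
      rw [if_pos hrk]
      rw [hvk]
      simp
    · rw [if_neg hrk] at hvk
      rw [if_neg hrk]
      rw [hlive]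
      by_cases hmem : k ∈ g.getD i []
      · have hik : i ∈ g.getD k [] := ((hg i).2.2 k).1 hmem
        have hge : 1 ≤ liveB g removed k := liveB_pos g removed hik hri
        rw [if_pos ⟨hmem, by omega⟩, if_pos hik, hvk]
      · have hik : i ∉ g.getD k [] := fun h => hmem (((hg k).2.2 i).1 h)
        rw [if_neg (by tauto), if_neg hik, hvk]
        omega

theorem foldApair_char (coins : List Int) (l : List Int) (cnt : List Int) (q : List Int)
    (hnd : l.Nodup) (hm : ∀ j ∈ l, 0 ≤ j ∧ j < (cnt.length : Int)) :
    l.foldl (fun s j =>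
        if getI s.1 j > 0 then
          let c := pySet s.1 j (getI s.1 j - 1)
          if getI c j == 1 && getI coins j == 0 then (c, s.2 ++ [j]) else (c, s.2)
        else s) (cnt, q)
      = (l.foldl (fun c k => if getI c k > 0 then pySet c k (getI c k - 1) else c) cnt,
         q ++ l.filter (fun j => (getI cnt j == 2) && (getI coins j == 0))) := by
  induction l generalizing cnt q with
  | nil => simp
  | cons a t ih =>
      have ha := hm a (by simp)
      have hat : a ∉ t := (List.nodup_cons.1 hnd).1
      simp only [List.foldl_cons]
      by_cases hpos : getI cnt a > 0
      · rw [if_pos hpos]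
        have hca : getI (pySet cnt a (getI cnt a - 1)) a = getI cnt a - 1 :=
          getI_pySet_self cnt a _ ha.1 ha.2
        have hfil : t.filter (fun j => (getI (pySet cnt a (getI cnt a - 1)) j == 2)
              && (getI coins j == 0))
            = t.filter (fun j => (getI cnt j == 2) && (getI coins j == 0)) := by
          apply List.filter_congr
          intro j hj
          rw [getI_pySet_ne cnt a j _ ha.1 ha.2 (hm j (by simp [hj])).1
              (fun h => hat (h ▸ hj))]
        have hmt : ∀ j ∈ t, 0 ≤ j ∧ j < ((pySet cnt a (getI cnt a - 1)).length : Int) := by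
          rw [length_pySet]; exact fun j hj => hm j (by simp [hj])
        by_cases hcond : (getI cnt a - 1 == 1 && getI coins a == 0) = true
        · rw [hca, if_pos hcond]
          rw [ih _ _ hnd.of_cons hmt]
          rw [hfil]
          rw [List.filter_cons]
          have : ((getI cnt a == 2) && (getI coins a == 0)) = true := by
            simp only [Bool.and_eq_true, beq_iff_eq] at hcond ⊢
            omega
          rw [if_pos this]
          simp
          rw [if_pos hpos]
        · rw [hca, if_neg hcond]
          rw [ih _ _ hnd.of_cons hmt]
          rw [hfil]
          rw [List.filter_cons]
          have : ¬ ((getI cnt a == 2) && (getI coins a == 0)) = true := by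
            simp only [Bool.and_eq_true, beq_iff_eq] at hcond ⊢
            omega
          rw [if_neg this]
          simp
          rw [if_pos hpos]
      · rw [if_neg hpos]
        rw [ih _ _ hnd.of_cons (fun j hj => hm j (by simp [hj]))]
        rw [List.filter_cons]
        have : ¬ ((getI cnt a == 2) && (getI coins a == 0)) = true := by
          simp only [Bool.and_eq_true, beq_iff_eq]
          omega
        rw [if_neg this]
        rw [if_neg hpos]

theorem filterEq {n : Nat} {g : PySem.Dict Int (List Int)} (hg : GraphOK n g)
    (coins : List Int) {cnt : List Int} {removed : List Bool} {i : Int}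
    (hInv : CInv n g cnt removed) (hi0 : 0 ≤ i) (hi1 : i < (n : Int))
    (hri : getB removed i = false) :
    (g.getD i []).filter (fun j => (getI (pySet cnt i 0) j == 2) && (getI coins j == 0))
      = (g.getD i []).filter (fun j =>
          !(getB (pySet removed i true) j) && (getI coins j == 0)
            && (liveB g (pySet removed i true) j == 1)) := by
  obtain ⟨hlc, hlr, hiv⟩ := hInv
  apply List.filter_congr
  intro j hj
  have hjr := ((hg i).2.1 j hj).1
  have hji : j ≠ i := ((hg i).2.1 j hj).2
  have hcj : getI (pySet cnt i 0) j = getI cnt j :=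
    getI_pySet_ne cnt i j 0 hi0 (by omega) hjr.1 hji
  have hbj : getB (pySet removed i true) j = getB removed j :=
    getB_pySet_ne removed i j true hi0 (by omega) hjr.1 hji
  have hlj : liveB g (pySet removed i true) j = liveB g removed j - 1 := by
    rw [liveB_pySet hg removed j hi0 (by omega) hri]
    rw [if_pos (((hg i).2.2 j).1 hj)]
  have hvj := hiv j hjr.1 hjr.2
  rw [hcj, hbj, hlj]
  by_cases hrj : getB removed j = true
  · rw [if_pos hrj] at hvj
    simp [hrj, hvj]
  · rw [if_neg hrj] at hvj
    rw [hvj]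
    simp only [Bool.not_eq_true] at hrj
    simp only [hrj, Bool.not_false, Bool.true_and]
    cases hc : (getI coins j == 0) with
    | false => simp
    | true =>
        simp only [Bool.and_true, Bool.true_and]
        by_cases h2 : liveB g removed j = 2
        · have h1 : liveB g removed j - 1 = 1 := by omega
          simp [h2]
        · have h1 : ¬ (liveB g removed j - 1 = 1) := by omega
          simp [h2, h1]

theorem QOK_step {n : Nat} {g : PySem.Dict Int (List Int)} (hg : GraphOK n g)
    (coins : List Int) {cnt : List Int} {removed : List Bool} {i : Int} {rest : List Int}
    (hInv : CInv n g cnt removed) (hq : QOK n g removed (i :: rest)) :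
    QOK n g (pySet removed i true)
      (rest ++ (g.getD i []).filter (fun j =>
          !(getB (pySet removed i true) j) && (getI coins j == 0)
            && (liveB g (pySet removed i true) j == 1))) := by
  obtain ⟨hlc, hlr, hiv⟩ := hInv
  obtain ⟨hnd, hmem⟩ := hq
  have hi := hmem i (by simp)
  have hi0 := hi.1.1
  have hi1 := hi.1.2
  have hri := hi.2.1
  have hirest : i ∉ rest := (List.nodup_cons.1 hnd).1
  set removed' := pySet removed i true with hrem'
  have hfiltmem : ∀ x ∈ (g.getD i []).filter (fun j =>
      !(getB removed' j) && (getI coins j == 0) && (liveB g removed' j == 1)),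
      x ∈ g.getD i [] ∧ getB removed' x = false ∧ liveB g removed' x = 1 := by
    intro x hx
    have h1 := List.mem_filter.1 hx
    have h2 := h1.2
    simp only [Bool.and_eq_true, Bool.not_eq_true', beq_iff_eq] at h2
    exact ⟨h1.1, h2.1.1, h2.2⟩
  constructor
  · apply List.Nodup.append hnd.of_cons ((hg i).1.filter _)
    intro x hxrest hxfilt
    obtain ⟨hadj, hur, hl1⟩ := hfiltmem x hxfilt
    have hxr := hmem x (by simp [hxrest])
    have hlive' : liveB g removed' x = liveB g removed x - 1 := by
      rw [hrem', liveB_pySet hg removed x hi0 (by omega) hri]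
      rw [if_pos (((hg i).2.2 x).1 hadj)]
    have := hxr.2.2
    omega
  · intro x hx
    rcases List.mem_append.1 hx with hxrest | hxfilt
    · have hxr := hmem x (by simp [hxrest])
      have hxi : x ≠ i := fun h => hirest (h ▸ hxrest)
      have hb : getB removed' x = getB removed x :=
        getB_pySet_ne removed i x true hi0 (by omega) hxr.1.1 hxi
      have hlive' : liveB g removed' x = liveB g removed x - (if i ∈ g.getD x [] then 1 else 0) := by
        rw [hrem', liveB_pySet hg removed x hi0 (by omega) hri]
      refine ⟨hxr.1, by rw [hb]; exact hxr.2.1, ?_⟩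
      have := hxr.2.2
      rw [hlive']
      split <;> omega
    · obtain ⟨hadj, hur, hl1⟩ := hfiltmem x hxfilt
      exact ⟨((hg i).2.1 x hadj).1, hur, by omega⟩

-- ---- degree of a node inside an arbitrary boolean-predicate set ----
def dB (g : PySem.Dict Int (List Int)) (p : Int → Bool) (i : Int) : Nat :=
  (g.getD i []).countP p

-- the positive live set of a removed-flag state (what A's nonzero counters denote)
def Pv (g : PySem.Dict Int (List Int)) (F : List Bool) (i : Int) : Bool :=
  !(getB F i) && decide ((0 : Int) < liveB g F i)

theorem liveB_ge_dB {g : PySem.Dict Int (List Int)} (p : Int → Bool) (F : List Bool) (j : Int)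
    (h : ∀ k ∈ g.getD j [], p k = true → getB F k = false) :
    (dB g p j : Int) ≤ liveB g F j := by
  rw [liveB_eq_countP_not]
  unfold dB
  have := List.countP_mono_left (l := g.getD j []) (p := p) (q := fun k => !(getB F k))
    (by intro a ha hpa; simp [h a ha hpa])
  omega

-- countP over a Bool list vs countP over its index range
theorem countP_eq_countP_range (F : List Bool) (p : Bool → Bool) :
    F.countP p = (List.range F.length).countP (fun k => p (F.getD k false)) := by
  induction F with
  | nil => simp
  | cons a t ih =>
      simp only [List.length_cons, List.range_succ_eq_map]
      rw [List.countP_cons, List.countP_cons, List.countP_map]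
      have : (List.range t.length).countP ((fun k => p ((a :: t).getD k false)) ∘ Nat.succ)
          = (List.range t.length).countP (fun k => p (t.getD k false)) := by
        apply List.countP_congr
        intro k _
        simp [Function.comp]
      rw [this, ← ih]
      simp only [List.getD_cons_zero]

-- number of queue members is at most the number of removed-capable (false) flags
theorem qlen_le_countFalse {n : Nat} (F : List Bool) (hF : F.length = n) (q : List Int)
    (hnd : q.Nodup) (hmem : ∀ x ∈ q, (0 ≤ x ∧ x < (n : Int)) ∧ getB F x = false) :
    q.length ≤ F.countP (fun b => !b) := by
  have hmapnd : (q.map Int.toNat).Nodup := by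
    apply List.Nodup.map_on _ hnd
    intro x hx y hy hxy
    have hx0 := (hmem x hx).1.1
    have hy0 := (hmem y hy).1.1
    omega
  have hsub : ∀ k ∈ q.map Int.toNat, k ∈ (List.range n).filter (fun k => !(F.getD k false)) := by
    intro k hk
    obtain ⟨x, hxq, rfl⟩ := List.mem_map.1 hk
    obtain ⟨⟨hx0, hx1⟩, hxf⟩ := hmem x hxq
    rw [List.mem_filter, List.mem_range]
    constructor
    · omega
    · have : getB F x = PySem.List.pyGetD F x false := rfl
      rw [this, PySem.List.pyGetD_of_nonneg _ _ hx0] at hxf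
      rw [List.getD_eq_getElem?_getD] at hxf
      simp [hxf]
  have hcard : (q.map Int.toNat).length ≤ ((List.range n).filter (fun k => !(F.getD k false))).length := by
    have h1 : (q.map Int.toNat).toFinset.card = (q.map Int.toNat).length :=
      List.toFinset_card_of_nodup hmapnd
    have h2 : ((List.range n).filter (fun k => !(F.getD k false))).toFinset.card
        = ((List.range n).filter (fun k => !(F.getD k false))).length :=
      List.toFinset_card_of_nodup ((List.nodup_range).filter _)
    have h3 : (q.map Int.toNat).toFinset ⊆ ((List.range n).filter (fun k => !(F.getD k false))).toFinset := by
      intro k hk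
      rw [List.mem_toFinset] at hk ⊢
      exact hsub k hk
    have := Finset.card_le_card h3
    omega
  rw [List.length_map] at hcard
  calc q.length ≤ ((List.range n).filter (fun k => !(F.getD k false))).length := hcard
    _ = (List.range n).countP (fun k => !(F.getD k false)) := (List.countP_eq_length_filter).symm
    _ = F.countP (fun b => !b) := by rw [countP_eq_countP_range F (fun b => !b), hF]

theorem countFalse_pySet_true (F : List Bool) (i : Int)
    (h0 : 0 ≤ i) (h1 : i < (F.length : Int)) (hf : getB F i = false) :
    (pySet F i true).countP (fun b => !b) + 1 = F.countP (fun b => !b) := by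
  rw [pySet_of_nonneg F i true h0 h1]
  have : getB F i = F.getD i.toNat false := by
    unfold getB
    rw [PySem.List.pyGetD_of_nonneg _ _ h0]
  rw [this] at hf
  have hlt : i.toNat < F.length := by omega
  clear h0 h1 this
  generalize hk : i.toNat = k at *
  clear hk
  induction F generalizing k with
  | nil => simp at hlt
  | cons a t ih =>
      cases k with
      | zero =>
          simp only [List.getD_cons_zero] at hf
          subst hf
          simp
      | succ k =>
          simp only [List.getD_cons_succ] at hf
          simp only [List.set_cons_succ, List.countP_cons]
          have := ih k hf (by simpa using hlt)
          omega

-- ===== the merged simulation + drain + fixpoint-protection induction over the peel =====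
theorem loop_sim2 {n : Nat} {g : PySem.Dict Int (List Int)} (hg : GraphOK n g)
    (coins : List Int) (p : Int → Bool)
    (hp : ∀ i : Int, 0 ≤ i → i < (n : Int) → p i = true →
        1 ≤ dB g p i ∧ (getI coins i = 0 → 2 ≤ dB g p i)) :
    ∀ (fuel : Nat) (cnt : List Int) (F : List Bool) (q : List Int),
      CInv n g cnt F → QOK n g F q →
      (∀ x ∈ q, getI coins x = 0) →
      (∀ i : Int, 0 ≤ i → i < (n : Int) → getB F i = false → getI coins i = 0 →
          liveB g F i = 1 → i ∈ q) →
      (∀ i : Int, 0 ≤ i → i < (n : Int) → p i = true → getB F i = false) →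
      (∀ x ∈ q, p x = false) →
      2 * ((F.countP (fun b => !b) : Int)) - q.length ≤ (fuel : Int) →
      CInv n g (collectA_loop g coins fuel cnt q) (seqLoop g coins fuel F q) ∧
      (∀ i : Int, 0 ≤ i → i < (n : Int) → getB (seqLoop g coins fuel F q) i = false →
          getI coins i = 0 → ¬ (liveB g (seqLoop g coins fuel F q) i = 1)) ∧
      (∀ i : Int, 0 ≤ i → i < (n : Int) → p i = true →
          getB (seqLoop g coins fuel F q) i = false) := by
  intro fuel
  induction fuel with
  | zero =>
      intro cnt F q hInv hq hqc hcompl hdF hdq hphi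
      match q with
      | [] =>
          simp only [collectA_loop, seqLoop]
          refine ⟨hInv, ?_, hdF⟩
          intro i h0 h1 hF hc hl
          exact absurd (hcompl i h0 h1 hF hc hl) (List.not_mem_nil)
      | i :: rest =>
          exfalso
          have hle := qlen_le_countFalse F hInv.2.1 (i :: rest) hq.1
            (fun x hx => ⟨(hq.2 x hx).1, (hq.2 x hx).2.1⟩)
          have h1 : 1 ≤ (i :: rest).length := by simp
          push_cast at hphi
          omega
  | succ fuel ih =>
      intro cnt F q hInv hq hqc hcompl hdF hdq hphi
      match q with
      | [] =>
          simp only [collectA_loop, seqLoop]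
          refine ⟨hInv, ?_, hdF⟩
          intro i h0 h1 hF hc hl
          exact absurd (hcompl i h0 h1 hF hc hl) (List.not_mem_nil)
      | i :: rest =>
          have hi := hq.2 i (by simp)
          have hi0 := hi.1.1
          have hi1 := hi.1.2
          have hri := hi.2.1
          have hFlen : F.length = n := hInv.2.1
          simp only [collectA_loop, seqLoop]
          rw [foldApair_char coins (g.getD i []) (pySet cnt i 0) rest (hg i).1
              (by rw [length_pySet, hInv.1]; exact fun j hj => ((hg i).2.1 j hj).1)]
          rw [PySem.List.foldl_append_if_eq_filter
              (fun j => !(getB (pySet F i true) j) && (getI coins j == 0)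
                && (liveB g (pySet F i true) j == 1)) (g.getD i []) rest]
          rw [filterEq hg coins hInv hi0 hi1 hri]
          have hInv' := removeOne hg hInv hi0 hi1 hri
          have hq' := QOK_step hg coins hInv hq
          have hF1len : (pySet F i true).length = n := by rw [length_pySet, hFlen]
          have hF1i : getB (pySet F i true) i = true :=
            getB_pySet_self F i true hi0 (by omega)
          have hF1ne : ∀ j : Int, 0 ≤ j → j ≠ i → getB (pySet F i true) j = getB F j :=
            fun j hj hne => getB_pySet_ne F i j true hi0 (by omega) hj hne
          have hfiltmem : ∀ x ∈ (g.getD i []).filter (fun j =>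
              !(getB (pySet F i true) j) && (getI coins j == 0)
                && (liveB g (pySet F i true) j == 1)),
              x ∈ g.getD i [] ∧ getB (pySet F i true) x = false ∧ getI coins x = 0
                ∧ liveB g (pySet F i true) x = 1 := by
            intro x hx
            have h1 := List.mem_filter.1 hx
            have h2 := h1.2
            simp only [Bool.and_eq_true, Bool.not_eq_true', beq_iff_eq] at h2
            exact ⟨h1.1, h2.1.1, h2.1.2, h2.2⟩
          have hqc' : ∀ x ∈ rest ++ (g.getD i []).filter (fun j =>
              !(getB (pySet F i true) j) && (getI coins j == 0)
                && (liveB g (pySet F i true) j == 1)), getI coins x = 0 := by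
            intro x hx
            rcases List.mem_append.1 hx with hr | hf
            · exact hqc x (by simp [hr])
            · exact (hfiltmem x hf).2.2.1
          have hdF' : ∀ j : Int, 0 ≤ j → j < (n : Int) → p j = true →
              getB (pySet F i true) j = false := by
            intro j hj0 hj1 hpj
            by_cases hji : j = i
            · subst hji
              exact absurd hpj (by rw [hdq j (by simp)]; simp)
            · rw [hF1ne j hj0 hji]
              exact hdF j hj0 hj1 hpj
          have hdq' : ∀ x ∈ rest ++ (g.getD i []).filter (fun j =>
              !(getB (pySet F i true) j) && (getI coins j == 0)
                && (liveB g (pySet F i true) j == 1)), p x = false := by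
            intro x hx
            rcases List.mem_append.1 hx with hr | hf
            · exact hdq x (by simp [hr])
            · obtain ⟨hadj, hur, hcx, hl1⟩ := hfiltmem x hf
              have hxr := ((hg i).2.1 x hadj).1
              cases hpx : p x with
              | false => rfl
              | true =>
                  exfalso
                  have h2d := (hp x hxr.1 hxr.2 hpx).2 hcx
                  have hge : (dB g p x : Int) ≤ liveB g (pySet F i true) x :=
                    liveB_ge_dB p (pySet F i true) x
                      (fun k hk hpk => hdF' k ((hg x).2.1 k hk).1.1 ((hg x).2.1 k hk).1.2 hpk)
                  omega
          have hcompl' : ∀ j : Int, 0 ≤ j → j < (n : Int) →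
              getB (pySet F i true) j = false → getI coins j = 0 →
              liveB g (pySet F i true) j = 1 →
              j ∈ rest ++ (g.getD i []).filter (fun k =>
                !(getB (pySet F i true) k) && (getI coins k == 0)
                  && (liveB g (pySet F i true) k == 1)) := by
            intro j hj0 hj1 hFj hcj hlj
            have hji : j ≠ i := by
              intro h; rw [h, hF1i] at hFj; exact absurd hFj (by simp)
            have hlive := liveB_pySet hg F (i := i) j hi0 (by omega) hri
            by_cases hmem : i ∈ g.getD j []
            · refine List.mem_append.2 (Or.inr (List.mem_filter.2 ⟨((hg j).2.2 i).1 hmem, ?_⟩))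
              simp only [Bool.and_eq_true, Bool.not_eq_true', beq_iff_eq]
              exact ⟨⟨hFj, hcj⟩, hlj⟩
            · have hsame : liveB g (pySet F i true) j = liveB g F j := by
                rw [hlive, if_neg hmem]; ring
              have hFj' : getB F j = false := by rw [← hF1ne j hj0 hji]; exact hFj
              have := hcompl j hj0 hj1 hFj' hcj (by rw [← hsame]; exact hlj)
              rcases List.mem_cons.1 this with h | h
              · exact absurd h hji
              · exact List.mem_append.2 (Or.inl h)
          have hphi' : 2 * (((pySet F i true).countP (fun b => !b) : Int))
              - (rest ++ (g.getD i []).filter (fun j =>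
                !(getB (pySet F i true) j) && (getI coins j == 0)
                  && (liveB g (pySet F i true) j == 1))).length ≤ (fuel : Int) := by
            have hcf := countFalse_pySet_true F i hi0 (by omega) hri
            rw [List.length_append]
            simp only [List.length_cons] at hphi
            omega
          exact ih _ _ _ hInv' hq' hqc' hcompl' hdF' hdq' hphi'

-- mark one layer: the proof-side flag version of A's round
def markRound (g : PySem.Dict Int (List Int)) (n : Nat) (F : List Bool) : List Bool :=
  ((PySem.List.pyRange 0 n 1).filter (fun i => !(getB F i) && liveB g F i == 1)).foldl
    (fun r i => pySet r i true) F

theorem markfold_sim {n : Nat} {g : PySem.Dict Int (List Int)} (hg : GraphOK n g) :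
    ∀ (ls : List Int) (cnt : List Int) (removed : List Bool),
      ls.Nodup → (∀ x ∈ ls, (0 ≤ x ∧ x < (n : Int)) ∧ getB removed x = false) →
      CInv n g cnt removed →
      CInv n g
        (ls.foldl (fun cnt i =>
            (g.getD i []).foldl (fun c k => if getI c k > 0 then pySet c k (getI c k - 1) else c)
              (pySet cnt i 0)) cnt)
        (ls.foldl (fun r i => pySet r i true) removed) := by
  intro ls
  induction ls with
  | nil => intro cnt removed _ _ hInv; exact hInv
  | cons x t ih =>
      intro cnt removed hnd hmem hInv
      have hx := hmem x (by simp)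
      simp only [List.foldl_cons]
      apply ih _ _ hnd.of_cons
      · intro y hy
        have hyy := hmem y (by simp [hy])
        have hyx : y ≠ x := fun h => (List.nodup_cons.1 hnd).1 (h ▸ hy)
        refine ⟨hyy.1, ?_⟩
        rw [getB_pySet_ne removed x y true hx.1.1 (by rw [hInv.2.1]; exact hx.1.2) hyy.1.1 hyx]
        exact hyy.2
      · exact removeOne hg hInv hx.1.1 hx.1.2 hx.2

theorem round_sim {n : Nat} {g : PySem.Dict Int (List Int)} (hg : GraphOK n g)
    {cnt : List Int} {removed : List Bool} (hInv : CInv n g cnt removed) :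
    CInv n g (collectA_round g n cnt) (markRound g n removed) := by
  simp only [collectA_round, markRound]
  have hfil : (PySem.List.pyRange 0 n 1).filter (fun i => getI cnt i == 1)
      = (PySem.List.pyRange 0 n 1).filter
          (fun i => !(getB removed i) && liveB g removed i == 1) := by
    apply List.filter_congr
    intro i hi
    have hr := PySem.List.mem_pyRange_one.1 hi
    have hvi := hInv.2.2 i hr.1 hr.2
    cases hrm : getB removed i with
    | true => rw [if_pos hrm] at hvi; simp [hvi]
    | false =>
        rw [if_neg (by simp [hrm])] at hvi
        simp [hvi]
  rw [hfil]
  apply markfold_sim hg _ _ _ (((PySem.List.nodup_pyRange_one _ _)).filter _)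
  · intro x hx
    have h1 := List.mem_filter.1 hx
    have hr := PySem.List.mem_pyRange_one.1 h1.1
    have h2 := h1.2
    simp only [Bool.and_eq_true, Bool.not_eq_true'] at h2
    exact ⟨⟨hr.1, hr.2⟩, h2.1⟩
  · exact hInv

-- ---- counting lemmas for the final answer ----
theorem count_eq_countP_range (xs : List Int) (v : Int) :
    List.count v xs = (List.range xs.length).countP (fun k => xs.getD k 0 == v) := by
  induction xs with
  | nil => simp
  | cons a t ih =>
      rw [List.count_cons]
      simp only [List.length_cons, List.range_succ_eq_map]
      rw [List.countP_cons, List.countP_map]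
      have : (List.range t.length).countP ((fun k => (a :: t).getD k 0 == v) ∘ Nat.succ)
          = (List.range t.length).countP (fun k => t.getD k 0 == v) := by
        apply List.countP_congr
        intro k _
        simp [Function.comp]
      rw [this, ← ih]
      simp only [List.getD_cons_zero]

theorem count_via_pyRange (xs : List Int) (v : Int) :
    List.count v xs = (PySem.List.pyRange 0 xs.length 1).countP (fun i => getI xs i == v) := by
  rw [PySem.List.pyRange_one, List.countP_map, count_eq_countP_range]
  apply List.countP_congr
  intro k _
  simp only [Function.comp]
  rw [show ((0 : Int) + (k : Int)) = ((k : Nat) : Int) by omega]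
  rw [show getI xs ((k : Nat) : Int) = xs.getD k 0 from PySem.List.pyGetD_natCast xs k 0]

theorem countPB_via_pyRange (F : List Bool) :
    F.countP (fun b => b) = (PySem.List.pyRange 0 F.length 1).countP (fun i => getB F i) := by
  rw [PySem.List.pyRange_one, List.countP_map, countP_eq_countP_range F (fun b => b)]
  apply List.countP_congr
  intro k _
  simp only [Function.comp]
  rw [show ((0 : Int) + (k : Int)) = ((k : Nat) : Int) by omega]
  rw [show getB F ((k : Nat) : Int) = F.getD k false from PySem.List.pyGetD_natCast F k false]

-- final answer from A's counters = final answer from a pointwise-equal alive list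
theorem final_eq {n : Nat} {g : PySem.Dict Int (List Int)} {cnt : List Int} {F : List Bool}
    (hInv : CInv n g cnt F) (alive : List Bool) (halen : alive.length = n)
    (heq : ∀ i : Int, 0 ≤ i → i < (n : Int) → getB alive i = Pv g F i) :
    max ((((n : Int) - (PySem.List.count cnt 0 : Int)) - 1) <<< (1 : Nat)) 0
      = max (2 * ((alive.countP (fun b => b) : Int) - 1)) 0 := by
  obtain ⟨hlc, hlr, hiv⟩ := hInv
  have hcount : PySem.List.count cnt 0 = List.count 0 cnt := PySem.List.count_eq cnt 0
  have hc2 : List.count 0 cnt = (PySem.List.pyRange 0 n 1).countP (fun i => getI cnt i == 0) := by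
    rw [count_via_pyRange cnt 0, hlc]
  have halive : alive.countP (fun b => b)
      = (PySem.List.pyRange 0 n 1).countP (fun i => getB alive i) := by
    rw [countPB_via_pyRange alive, halen]
  have hcong : (PySem.List.pyRange 0 (n : Int) 1).countP (fun i => getB alive i)
      = (PySem.List.pyRange 0 (n : Int) 1).countP (fun i => !(getI cnt i == 0)) := by
    apply List.countP_congr
    intro i hi
    have hr := PySem.List.mem_pyRange_one.1 hi
    have hvi := hiv i hr.1 hr.2
    rw [heq i hr.1 hr.2]
    unfold Pv
    cases hrm : getB F i with
    | true => rw [if_pos hrm] at hvi; simp [hvi]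
    | false =>
        rw [if_neg (by simp [hrm])] at hvi
        have hnn := liveB_nonneg g F i
        rw [hvi]
        simp only [Bool.not_false, Bool.true_and]
        by_cases hz : liveB g F i = 0
        · simp [hz]
        · have : (0 : Int) < liveB g F i := by omega
          simp [hz, this]
  have hsplit : (PySem.List.pyRange 0 (n : Int) 1).countP (fun i => getI cnt i == 0)
        + (PySem.List.pyRange 0 (n : Int) 1).countP (fun i => !(getI cnt i == 0))
      = (PySem.List.pyRange 0 (n : Int) 1).length := by
    rw [List.length_eq_countP_add_countP (p := fun i => getI cnt i == 0)]
    congr 1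
    apply List.countP_congr
    intro a _
    simp
  have hlen : (PySem.List.pyRange 0 (n : Int) 1).length = n := by
    rw [PySem.List.pyRange_one]
    simp
  rw [Int.shiftLeft_eq, pow_one]
  rw [hcount, hc2, halive, hcong]
  have h1 : ((n : Int) - (PySem.List.pyRange 0 (n : Int) 1).countP (fun i => getI cnt i == 0))
      = ((PySem.List.pyRange 0 (n : Int) 1).countP (fun i => !(getI cnt i == 0)) : Int) := by
    omega
  rw [h1]
  congr 1
  ring

-- ---- the build phase of A, split into its two independent accumulators ----
def buildStepC : List Int → List Int → List Int := fun c e =>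
  match e with
  | [u, v] => pySet (pySet c u (getI c u + 1)) v (getI (pySet c u (getI c u + 1)) v + 1)
  | _ => c

theorem buildA_split (edges : List (List Int)) (d : PySem.Dict Int (List Int)) (c : List Int) :
    edges.foldl (fun gc e =>
      match e with
      | [u, v] =>
          ((gc.1.modify u [] (· ++ [v])).modify v [] (· ++ [u]),
           pySet (pySet gc.2 u (getI gc.2 u + 1)) v (getI (pySet gc.2 u (getI gc.2 u + 1)) v + 1))
      | _ => gc) (d, c)
    = (edges.foldl (fun d e =>
        match e with
        | [u, v] => (d.modify u [] (· ++ [v])).modify v [] (· ++ [u])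
        | _ => d) d,
       edges.foldl buildStepC c) := by
  induction edges generalizing d c with
  | nil => rfl
  | cons e es ih =>
      match e with
      | [] => exact ih d c
      | [u] => exact ih d c
      | u :: v :: w :: t => exact ih d c
      | [u, v] => exact ih _ _

theorem cntC_eq_dirs (edges : List (List Int)) (c : List Int) :
    edges.foldl buildStepC c
      = (dirs edges).foldl (fun c p => pySet c p.1 (getI c p.1 + 1)) c := by
  induction edges generalizing c with
  | nil => rfl
  | cons e es ih =>
      match e with
      | [] => exact ih c
      | [u] => exact ih c
      | u :: v :: w :: t => exact ih c
      | [u, v] =>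
          have hd : dirs ([u, v] :: es) = (u, v) :: (v, u) :: dirs es := rfl
          rw [hd, List.foldl_cons, List.foldl_cons, List.foldl_cons, ← ih]
          rfl

theorem incfold_length (l : List (Int × Int)) (c : List Int) :
    (l.foldl (fun c p => pySet c p.1 (getI c p.1 + 1)) c).length = c.length := by
  induction l generalizing c with
  | nil => rfl
  | cons p t ih => rw [List.foldl_cons, ih, length_pySet]

theorem incfold_char (l : List (Int × Int)) (c : List Int)
    (hm : ∀ p ∈ l, 0 ≤ p.1 ∧ p.1 < (c.length : Int)) :
    ∀ k : Int, 0 ≤ k → k < (c.length : Int) →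
      getI (l.foldl (fun c p => pySet c p.1 (getI c p.1 + 1)) c) k
        = getI c k + (l.countP (fun p => p.1 == k) : Int) := by
  induction l generalizing c with
  | nil => intro k _ _; simp
  | cons p t ih =>
      intro k hk0 hk1
      have hp := hm p (by simp)
      have hlen : (pySet c p.1 (getI c p.1 + 1)).length = c.length := length_pySet _ _ _
      rw [List.foldl_cons,
        ih _ (by rw [hlen]; exact fun q hq => hm q (by simp [hq])) k hk0 (by rw [hlen]; exact hk1)]
      rw [List.countP_cons]
      by_cases hkp : p.1 = k
      · rw [hkp, getI_pySet_self c k _ hk0 hk1]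
        simp
        omega
      · rw [getI_pySet_ne c p.1 k _ hp.1 hp.2 hk0 (fun h => hkp h.symm)]
        simp
        exact hkp

theorem getB_replicate_false (n : Nat) (j : Int) :
    getB (List.replicate n false) j = false := by
  unfold getB PySem.List.pyGetD PySem.List.pyGet?
  cases h : PySem.List.pyIdx? (List.replicate n false).length j with
  | none => rfl
  | some k =>
      simp only [Option.bind_some]
      cases hk : (List.replicate n false)[k]? with
      | none => rfl
      | some b =>
          have : b = false := by
            have := List.mem_of_getElem? hk
            exact (by simpa using this : ¬ n = 0 ∧ b = false).2
          simp [this]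

theorem getB_replicate_true (n : Nat) (j : Int) (h0 : 0 ≤ j) (h1 : j < (n : Int)) :
    getB (List.replicate n true) j = true := by
  unfold getB
  rw [PySem.List.pyGetD_of_nonneg _ _ h0]
  rw [List.getD_eq_getElem?_getD]
  rw [List.getElem?_replicate]
  rw [if_pos (by omega)]
  rfl

theorem getI_replicate_zero (n : Nat) (k : Int) (hk0 : 0 ≤ k) (_hk1 : k < (n : Int)) :
    getI (List.replicate n (0 : Int)) k = 0 := by
  unfold getI
  rw [PySem.List.pyGetD_of_nonneg _ _ hk0]
  simp [List.getD]

theorem countP_getB_replicate (n : Nat) (l : List Int) :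
    l.countP (fun j => getB (List.replicate n false) j) = 0 := by
  rw [List.countP_eq_zero]
  intro j _
  simp [getB_replicate_false]

theorem liveB_replicate (g : PySem.Dict Int (List Int)) (n : Nat) (i : Int) :
    liveB g (List.replicate n false) i = ((g.getD i []).length : Int) := by
  rw [liveB_eq_sub_countP, countP_getB_replicate]
  simp

theorem adj_length_eq_countP (edges : List (List Int)) (k : Int) :
    ((buildDict edges).getD k []).length = (dirs edges).countP (fun p => p.1 == k) := by
  rw [adj_buildDict, List.length_map, ← List.countP_eq_length_filter]

theorem cnt0_CInv {coins : List Int} {edges : List (List Int)}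
    (hPre : Pre_collectTheCoins coins edges) :
    CInv coins.length (buildDict edges)
      (edges.foldl buildStepC (List.replicate coins.length (0 : Int)))
      (List.replicate coins.length false) := by
  have hmd : ∀ p ∈ dirs edges, 0 ≤ p.1 ∧ p.1 < ((List.replicate coins.length (0:Int)).length : Int) := by
    intro p hp
    have := dirs_range hPre.1 p hp
    simpa using this.1
  refine ⟨by rw [cntC_eq_dirs, incfold_length]; simp, by simp, ?_⟩
  intro i hi0 hi1
  rw [cntC_eq_dirs]
  rw [incfold_char (dirs edges) _ hmd i hi0 (by simpa using hi1)]
  rw [getI_replicate_zero coins.length i hi0 hi1]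
  rw [getB_replicate_false, liveB_replicate]
  simp [adj_length_eq_countP]

theorem q0_eq {coins : List Int} {edges : List (List Int)}
    (hInv0 : CInv coins.length (buildDict edges)
      (edges.foldl buildStepC (List.replicate coins.length (0 : Int)))
      (List.replicate coins.length false)) :
    (PySem.List.pyRange 0 coins.length 1).filter
        (fun i => getI (edges.foldl buildStepC (List.replicate coins.length (0 : Int))) i == 1
          && getI coins i == 0)
      = (PySem.List.pyRange 0 coins.length 1).filter
        (fun i => getI coins i == 0
          && liveB (buildDict edges) (List.replicate coins.length false) i == 1) := by
  apply List.filter_congr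
  intro i hi
  have hr := PySem.List.mem_pyRange_one.1 hi
  have hv := hInv0.2.2 i hr.1 hr.2
  rw [getB_replicate_false] at hv
  simp only [if_neg (by simp : ¬ (false = true))] at hv
  rw [hv, Bool.and_comm]

theorem QOK0 {coins : List Int} {edges : List (List Int)}
    (hInv0 : CInv coins.length (buildDict edges)
      (edges.foldl buildStepC (List.replicate coins.length (0 : Int)))
      (List.replicate coins.length false)) :
    QOK coins.length (buildDict edges) (List.replicate coins.length false)
      ((PySem.List.pyRange 0 coins.length 1).filter
        (fun i => getI (edges.foldl buildStepC (List.replicate coins.length (0 : Int))) i == 1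
          && getI coins i == 0)) := by
  constructor
  · exact (PySem.List.nodup_pyRange_one _ _).filter _
  · intro x hx
    have h1 := List.mem_filter.1 hx
    have hr := PySem.List.mem_pyRange_one.1 h1.1
    have hv := hInv0.2.2 x hr.1 hr.2
    rw [getB_replicate_false] at hv
    simp only [if_neg (by simp : ¬ (false = true))] at hv
    have h2 := h1.2
    simp only [Bool.and_eq_true, beq_iff_eq] at h2
    refine ⟨⟨hr.1, hr.2⟩, getB_replicate_false _ _, ?_⟩
    rw [← hv, h2.1]

theorem a_unfold (coins : List Int) (edges : List (List Int)) :
    collectTheCoins coins edges =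
      max ((((coins.length : Int) - (PySem.List.count
          ((PySem.List.pyRange 0 2 1).foldl
            (fun c _ => collectA_round (buildDict edges) coins.length c)
            (collectA_loop (buildDict edges) coins (2 * coins.length + 1)
              (edges.foldl buildStepC (List.replicate coins.length (0 : Int)))
              ((PySem.List.pyRange 0 coins.length 1).filter
                (fun i => getI (edges.foldl buildStepC (List.replicate coins.length (0 : Int))) i == 1
                  && getI coins i == 0))))
          0 : Int)) - 1) <<< (1 : Nat)) 0 := by
  simp only [collectTheCoins]
  rw [buildA_split]
  rfl

-- ===== the B side: degrees from the edge scan, the fixpoint iteration, the rounds =====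

theorem bDeg_eq_dirs (n : Nat) (edges : List (List Int)) (alive : List Bool) :
    bDeg n edges alive
      = (dirs edges).foldl
          (fun d p => if getB alive p.2 then pySet d p.1 (getI d p.1 + 1) else d)
          (List.replicate n (0 : Int)) := by
  unfold bDeg
  generalize (List.replicate n (0 : Int)) = c
  induction edges generalizing c with
  | nil => rfl
  | cons e es ih =>
      match e with
      | [] =>
          rw [List.foldl_cons, if_neg (by simp)]
          exact ih c
      | [u] =>
          rw [List.foldl_cons, if_neg (by simp)]
          exact ih c
      | u :: v :: w :: t =>
          rw [List.foldl_cons, if_neg (by simp)]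
          exact ih c
      | [u, v] =>
          have hd : dirs ([u, v] :: es) = (u, v) :: (v, u) :: dirs es := rfl
          rw [List.foldl_cons, if_pos (by simp)]
          rw [hd, List.foldl_cons, List.foldl_cons, ← ih]
          rfl

theorem condincfold_char (alive : List Bool) (l : List (Int × Int)) (c : List Int)
    (hm : ∀ p ∈ l, 0 ≤ p.1 ∧ p.1 < (c.length : Int)) :
    ∀ k : Int, 0 ≤ k → k < (c.length : Int) →
      getI (l.foldl (fun d p => if getB alive p.2 then pySet d p.1 (getI d p.1 + 1) else d) c) k
        = getI c k + (l.countP (fun p => p.1 == k && getB alive p.2) : Int) := by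
  induction l generalizing c with
  | nil => intro k _ _; simp
  | cons p t ih =>
      intro k hk0 hk1
      have hp := hm p (by simp)
      rw [List.foldl_cons, List.countP_cons]
      by_cases hal : getB alive p.2 = true
      · rw [if_pos hal]
        have hlen : (pySet c p.1 (getI c p.1 + 1)).length = c.length := length_pySet _ _ _
        rw [ih _ (by rw [hlen]; exact fun q hq => hm q (by simp [hq])) k hk0 (by rw [hlen]; exact hk1)]
        by_cases hkp : p.1 = k
        · rw [hkp, getI_pySet_self c k _ hk0 hk1]
          simp [hkp, hal]
          omega
        · rw [getI_pySet_ne c p.1 k _ hp.1 hp.2 hk0 (fun h => hkp h.symm)]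
          simp [hkp]
      · rw [if_neg hal]
        rw [ih _ (fun q hq => hm q (by simp [hq])) k hk0 hk1]
        have hz : (p.1 == k && getB alive p.2) = false := by
          cases h : (p.1 == k) <;> simp [h, Bool.eq_false_iff.2 hal]
        simp [hz]

theorem getI_bDeg {coins : List Int} {edges : List (List Int)}
    (hPre1 : ∀ e ∈ edges, edgeOK (coins.length : Int) e = true)
    (alive : List Bool) (i : Int) (h0 : 0 ≤ i) (h1 : i < (coins.length : Int)) :
    getI (bDeg coins.length edges alive) i
      = (dB (buildDict edges) (fun j => getB alive j) i : Int) := by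
  rw [bDeg_eq_dirs]
  have hmd : ∀ p ∈ dirs edges, 0 ≤ p.1 ∧ p.1 < ((List.replicate coins.length (0:Int)).length : Int) := by
    intro p hp
    have := dirs_range hPre1 p hp
    simpa using this.1
  rw [condincfold_char alive (dirs edges) _ hmd i h0 (by simpa using h1)]
  rw [getI_replicate_zero coins.length i h0 h1]
  unfold dB
  rw [adj_buildDict]
  rw [List.countP_map, List.countP_filter]
  have : (dirs edges).countP (fun p => p.1 == i && getB alive p.2)
      = (dirs edges).countP (fun p => ((fun j => getB alive j) ∘ (·.2)) p && (p.1 == i)) := by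
    apply List.countP_congr
    intro a _
    simp [Function.comp, Bool.and_comm]
  omega

-- reading B's comprehensions
theorem getB_mapRange (n : Nat) (f : Int → Bool) (i : Int) (h0 : 0 ≤ i) (h1 : i < (n : Int)) :
    getB ((PySem.List.pyRange 0 n 1).map f) i = f i := by
  unfold getB
  rw [PySem.List.pyGetD_map_pyRange_of_nonneg f n i false h0 (by exact_mod_cast h1)]

theorem length_mapRange (n : Nat) (f : Int → Bool) :
    ((PySem.List.pyRange 0 n 1).map f).length = n := by
  rw [PySem.List.pyRange_one]
  simp

-- bStep read pointwise (under Pre_)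
theorem getB_bStep {coins : List Int} {edges : List (List Int)}
    (hPre1 : ∀ e ∈ edges, edgeOK (coins.length : Int) e = true)
    (alive : List Bool) (i : Int) (h0 : 0 ≤ i) (h1 : i < (coins.length : Int)) :
    getB (bStep coins edges alive) i
      = (getB alive i && decide (1 ≤ dB (buildDict edges) (fun j => getB alive j) i) &&
          (!(getI coins i == 0) || decide (2 ≤ dB (buildDict edges) (fun j => getB alive j) i))) := by
  unfold bStep
  rw [show @bGetB = @getB from rfl, show @bGetI = @getI from rfl]
  rw [getB_mapRange coins.length _ i h0 h1]
  rw [getI_bDeg hPre1 alive i h0 h1]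
  have e1 : decide ((0:Int) < (dB (buildDict edges) (fun j => getB alive j) i : Int))
      = decide (1 ≤ dB (buildDict edges) (fun j => getB alive j) i) := by
    simp only [decide_eq_decide]; omega
  have e2 : decide ((1:Int) < (dB (buildDict edges) (fun j => getB alive j) i : Int))
      = decide (2 ≤ dB (buildDict edges) (fun j => getB alive j) i) := by
    simp only [decide_eq_decide]; omega
  rw [e1, e2]

theorem length_bStep (coins : List Int) (edges : List (List Int)) (alive : List Bool) :
    (bStep coins edges alive).length = coins.length := by
  unfold bStep
  exact length_mapRange _ _

-- deflation and stabilization of the bStep iteration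
theorem count_lt_of_le (F G : List Bool) (hlen : F.length = G.length)
    (hle : ∀ k, k < F.length → F.getD k false = true → G.getD k false = true) :
    F = G ∨ F.countP (fun b => b) < G.countP (fun b => b) := by
  induction F generalizing G with
  | nil =>
      cases G with
      | nil => exact Or.inl rfl
      | cons b t => simp at hlen
  | cons a F' ih =>
      cases G with
      | nil => simp at hlen
      | cons b G' =>
          have hhd : a = true → b = true := by
            have := hle 0 (by simp)
            simpa using this
          have htl : ∀ k, k < F'.length → F'.getD k false = true → G'.getD k false = true := by
            intro k hk h
            have := hle (k + 1) (by simpa using hk)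
            simpa using this h
          rcases ih G' (by simpa using hlen) htl with rfl | hlt
          · by_cases hab : a = b
            · subst hab; exact Or.inl rfl
            · right
              rw [List.countP_cons, List.countP_cons]
              cases a with
              | true =>
                  cases b with
                  | true => exact absurd rfl hab
                  | false => exact absurd (hhd rfl) (by simp)
              | false =>
                  cases b with
                  | true => simp
                  | false => exact absurd rfl hab
          · right
            rw [List.countP_cons, List.countP_cons]
            cases a with
            | true => simp [hhd rfl]; omega
            | false => cases b <;> simp <;> omega

theorem bStep_le (coins : List Int) (edges : List (List Int)) (alive : List Bool)
    (halen : alive.length = coins.length) :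
    ∀ k, k < (bStep coins edges alive).length →
      (bStep coins edges alive).getD k false = true → alive.getD k false = true := by
  intro k hk h
  rw [length_bStep] at hk
  have h1 : (bStep coins edges alive).getD k false = getB (bStep coins edges alive) (k : Int) := by
    rw [show getB (bStep coins edges alive) ((k : Nat) : Int)
        = (bStep coins edges alive).getD k false from PySem.List.pyGetD_natCast _ k false]
  rw [h1] at h
  unfold bStep at h
  rw [getB_mapRange coins.length _ k (by omega) (by exact_mod_cast hk)] at h
  simp only [Bool.and_eq_true] at h
  have := h.1.1
  rw [show @bGetB = @getB from rfl] at this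
  rw [show getB alive ((k : Nat) : Int) = alive.getD k false from PySem.List.pyGetD_natCast _ k false] at this
  exact this

theorem bStep_iter_fix (coins : List Int) (edges : List (List Int)) :
    ∀ (m : Nat) (x : List Bool), x.length = coins.length → x.countP (fun b => b) ≤ m →
      bStep coins edges ((bStep coins edges)^[m + 1] x) = (bStep coins edges)^[m + 1] x := by
  intro m
  induction m with
  | zero =>
      intro x hlen hc
      rcases count_lt_of_le (bStep coins edges x) x (by rw [length_bStep, hlen]) (bStep_le coins edges x hlen) with heq | hlt
      · have h1 : (bStep coins edges)^[0 + 1] x = bStep coins edges x := by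
          rw [show (0 + 1 : Nat) = 1 from rfl, Function.iterate_one]
        rw [h1, heq]
        exact heq
      · omega
  | succ m ih =>
      intro x hlen hc
      rcases count_lt_of_le (bStep coins edges x) x (by rw [length_bStep, hlen]) (bStep_le coins edges x hlen) with heq | hlt
      · rw [Function.iterate_fixed heq]
        exact heq
      · have : (bStep coins edges)^[m + 1 + 1] x = (bStep coins edges)^[m + 1] (bStep coins edges x) :=
          Function.iterate_succ_apply (bStep coins edges) (m + 1) x
        rw [this]
        exact ih (bStep coins edges x) (length_bStep coins edges x) (by omega)

theorem countP_replicate_true (n : Nat) : (List.replicate n true).countP (fun b => b) = n := by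
  induction n with
  | zero => rfl
  | succ n ih => simp [List.replicate_succ, List.countP_cons, ih]

theorem foldl_const_iterate {α β : Type} (f : α → α) (l : List β) (x : α) :
    l.foldl (fun a _ => f a) x = f^[l.length] x := by
  induction l generalizing x with
  | nil => rfl
  | cons b t ih =>
      rw [List.foldl_cons, List.length_cons, Function.iterate_succ_apply]
      exact ih (f x)

theorem length_iter_bStep (coins : List Int) (edges : List (List Int)) (k : Nat) (x : List Bool)
    (hx : x.length = coins.length) : ((bStep coins edges)^[k] x).length = coins.length := by
  induction k generalizing x with
  | zero => simpa
  | succ k ih =>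
      rw [Function.iterate_succ_apply]
      exact ih _ (length_bStep coins edges x)

-- the stabilized phase-1 set (as produced by port B)
theorem alive1_fix (coins : List Int) (edges : List (List Int)) :
    bStep coins edges ((bStep coins edges)^[coins.length + 1] (List.replicate coins.length true))
      = (bStep coins edges)^[coins.length + 1] (List.replicate coins.length true) := by
  exact bStep_iter_fix coins edges coins.length (List.replicate coins.length true)
    (by simp) (by rw [countP_replicate_true])

-- P1 is contained in every bStep iterate
theorem P1_le_iter {coins : List Int} {edges : List (List Int)}
    (hPre1 : ∀ e ∈ edges, edgeOK (coins.length : Int) e = true)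
    (hg : GraphOK coins.length (buildDict edges))
    (F : List Bool)
    (hnl : ∀ i : Int, 0 ≤ i → i < (coins.length : Int) → getB F i = false →
        getI coins i = 0 → ¬ (liveB (buildDict edges) F i = 1)) :
    ∀ (k : Nat) (i : Int), 0 ≤ i → i < (coins.length : Int) →
      Pv (buildDict edges) F i = true →
      getB ((bStep coins edges)^[k] (List.replicate coins.length true)) i = true := by
  intro k
  induction k with
  | zero =>
      intro i h0 h1 _
      exact getB_replicate_true coins.length i h0 h1
  | succ k ih =>
      intro i h0 h1 hPv
      rw [Function.iterate_succ_apply']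
      rw [getB_bStep hPre1 _ i h0 h1]
      have hPv' := hPv
      unfold Pv at hPv'
      simp only [Bool.and_eq_true, Bool.not_eq_true', decide_eq_true_eq] at hPv'
      obtain ⟨hFi, hlive⟩ := hPv'
      set g := buildDict edges
      set It := (bStep coins edges)^[k] (List.replicate coins.length true) with hIt
      -- live neighbours of i are all in Pv, hence in It
      have hsub : ∀ j ∈ g.getD i [], (!(getB F j)) = true → getB It j = true := by
        intro j hj hFj
        have hjr := ((hg i).2.1 j hj).1
        apply ih j hjr.1 hjr.2
        unfold Pv
        simp only [Bool.and_eq_true, decide_eq_true_eq]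
        refine ⟨hFj, ?_⟩
        have : 1 ≤ liveB g F j := liveB_pos g F (((hg i).2.2 j).1 hj) hFi
        omega
      have hmono : (g.getD i []).countP (fun j => !(getB F j)) ≤ (g.getD i []).countP (fun j => getB It j) :=
        List.countP_mono_left (by intro a ha h; exact hsub a ha h)
      have hliveF : liveB g F i = ((g.getD i []).countP (fun j => !(getB F j)) : Int) :=
        liveB_eq_countP_not g F i
      have hd : 1 ≤ dB g (fun j => getB It j) i := by
        unfold dB
        omega
      rw [ih i h0 h1 hPv]
      by_cases hc : getI coins i = 0
      · have h2 : 2 ≤ liveB g F i := by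
          have := hnl i h0 h1 hFi hc
          omega
        have hd2 : 2 ≤ dB g (fun j => getB It j) i := by
          unfold dB
          omega
        simp [hd, hd2]
      · simp [hd, hc]

-- marking a whole layer of flags: pointwise reading
theorem getB_markfold (L : List Int) :
    ∀ (F : List Bool) (j : Int), (∀ x ∈ L, 0 ≤ x ∧ x < (F.length : Int)) → 0 ≤ j →
      getB (L.foldl (fun r i => pySet r i true) F) j = (getB F j || decide (j ∈ L)) := by
  induction L with
  | nil => intro F j _ _; simp
  | cons x t ih =>
      intro F j hmem hj
      have hx := hmem x (by simp)
      rw [List.foldl_cons]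
      rw [ih (pySet F x true) j (by rw [length_pySet]; exact fun y hy => hmem y (by simp [hy])) hj]
      by_cases hjx : j = x
      · subst hjx
        rw [getB_pySet_self F j true hx.1 hx.2]
        simp
      · rw [getB_pySet_ne F x j true hx.1 hx.2 hj hjx]
        simp [List.mem_cons, hjx]

theorem length_markfold (L : List Int) (F : List Bool) :
    (L.foldl (fun r i => pySet r i true) F).length = F.length := by
  induction L generalizing F with
  | nil => rfl
  | cons x t ih => rw [List.foldl_cons, ih, length_pySet]

theorem length_markRound (g : PySem.Dict Int (List Int)) (n : Nat) (F : List Bool) :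
    (markRound g n F).length = F.length := length_markfold _ _

def layerL (g : PySem.Dict Int (List Int)) (n : Nat) (F : List Bool) : List Int :=
  (PySem.List.pyRange 0 n 1).filter (fun i => !(getB F i) && liveB g F i == 1)

theorem markRound_eq (g : PySem.Dict Int (List Int)) (n : Nat) (F : List Bool) :
    markRound g n F = (layerL g n F).foldl (fun r i => pySet r i true) F := rfl

-- one round: B's two sweeps match A's leaf-marking on positive sets
theorem round_pointwise {coins : List Int} {edges : List (List Int)}
    (hPre1 : ∀ e ∈ edges, edgeOK (coins.length : Int) e = true)
    (hg : GraphOK coins.length (buildDict edges))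
    (F : List Bool) (alive : List Bool)
    (hFlen : F.length = coins.length)
    (heq : ∀ i : Int, 0 ≤ i → i < (coins.length : Int) →
        getB alive i = Pv (buildDict edges) F i) :
    ∀ i : Int, 0 ≤ i → i < (coins.length : Int) →
      getB (bRound coins edges alive) i
        = Pv (buildDict edges) (markRound (buildDict edges) coins.length F) i := by
  intro i h0 h1
  have hmemL : ∀ j : Int, j ∈ layerL (buildDict edges) coins.length F ↔
      (0 ≤ j ∧ j < (coins.length : Int) ∧ getB F j = false ∧ liveB (buildDict edges) F j = 1) := by
    intro j
    unfold layerL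
    rw [List.mem_filter, PySem.List.mem_pyRange_one]
    simp [and_assoc]
  have hmark : ∀ j : Int, 0 ≤ j →
      getB (markRound (buildDict edges) coins.length F) j
        = (getB F j || decide (j ∈ layerL (buildDict edges) coins.length F)) := by
    intro j hj
    rw [markRound_eq]
    refine getB_markfold _ F j ?_ hj
    intro x hx
    have := (hmemL x).1 hx
    rw [hFlen]
    exact ⟨this.1, this.2.1⟩
  have hda : ∀ k : Int, 0 ≤ k → k < (coins.length : Int) → getB F k = false →
      (dB (buildDict edges) (fun j => getB alive j) k : Int) = liveB (buildDict edges) F k := by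
    intro k hk0 hk1 hFk
    unfold dB
    rw [liveB_eq_countP_not]
    congr 1
    apply List.countP_congr
    intro j hj
    have hjr := ((hg k).2.1 j hj).1
    rw [heq j hjr.1 hjr.2]
    unfold Pv
    cases hFj : getB F j with
    | true => simp
    | false =>
        have : 1 ≤ liveB (buildDict edges) F j :=
          liveB_pos (buildDict edges) F (((hg k).2.2 j).1 hj) hFk
        simp only [Bool.not_false, Bool.true_and]
        simp [show (0 : Int) < liveB (buildDict edges) F j by omega]
  have ha2 : ∀ k : Int, 0 ≤ k → k < (coins.length : Int) →
      getB ((PySem.List.pyRange 0 coins.length 1).map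
          (fun j => bGetB alive j && decide (1 < bGetI (bDeg coins.length edges alive) j))) k
        = (getB alive k && decide (2 ≤ dB (buildDict edges) (fun j => getB alive j) k)) := by
    intro k hk0 hk1
    rw [show @bGetB = @getB from rfl, show @bGetI = @getI from rfl]
    rw [getB_mapRange coins.length _ k hk0 hk1]
    rw [getI_bDeg hPre1 alive k hk0 hk1]
    congr 1
    simp only [decide_eq_decide]
    omega
  set alive2 := (PySem.List.pyRange 0 coins.length 1).map
      (fun j => bGetB alive j && decide (1 < bGetI (bDeg coins.length edges alive) j)) with hA2
  have hbr : getB (bRound coins edges alive) i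
      = (getB alive2 i && decide (1 ≤ dB (buildDict edges) (fun j => getB alive2 j) i)) := by
    have hshow : bRound coins edges alive
        = (PySem.List.pyRange 0 coins.length 1).map
            (fun j => bGetB alive2 j && decide (0 < bGetI (bDeg coins.length edges alive2) j)) := rfl
    rw [hshow]
    rw [show @bGetB = @getB from rfl, show @bGetI = @getI from rfl]
    rw [getB_mapRange coins.length _ i h0 h1]
    rw [getI_bDeg hPre1 alive2 i h0 h1]
    congr 1
    simp only [decide_eq_decide]
    omega
  rw [hbr]
  unfold Pv
  rw [hmark i h0]
  have hlive' : liveB (buildDict edges) (markRound (buildDict edges) coins.length F) i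
      = (((buildDict edges).getD i []).countP
          (fun k => !(getB F k) && !(decide (k ∈ layerL (buildDict edges) coins.length F))) : Int) := by
    rw [liveB_eq_countP_not]
    congr 1
    apply List.countP_congr
    intro k hk
    rw [hmark k ((hg i).2.1 k hk).1.1]
    rw [Bool.not_or]
  cases hFi : getB F i with
  | true =>
      have h2 : getB alive2 i = false := by
        rw [ha2 i h0 h1, heq i h0 h1]
        unfold Pv
        simp [hFi]
      rw [h2]
      simp
  | false =>
      have hPvi : getB alive i = decide ((0 : Int) < liveB (buildDict edges) F i) := by
        rw [heq i h0 h1]; unfold Pv; simp [hFi]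
      have hnn := liveB_nonneg (buildDict edges) F i
      have hdi := hda i h0 h1 hFi
      have hiL : i ∈ layerL (buildDict edges) coins.length F ↔ liveB (buildDict edges) F i = 1 := by
        rw [hmemL i]
        constructor
        · intro h; exact h.2.2.2
        · intro h; exact ⟨h0, h1, hFi, h⟩
      by_cases hl1 : liveB (buildDict edges) F i = 1
      · have hiL' : decide (i ∈ layerL (buildDict edges) coins.length F) = true := by
          simp [hiL, hl1]
        have h2 : getB alive2 i = false := by
          rw [ha2 i h0 h1]
          have : ¬ (2 ≤ dB (buildDict edges) (fun j => getB alive j) i) := by omega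
          simp [this]
        rw [h2, hiL']
        simp
      · by_cases hl0 : liveB (buildDict edges) F i = 0
        · have h2 : getB alive2 i = false := by
            rw [ha2 i h0 h1, hPvi]
            simp [hl0]
          have hiL' : decide (i ∈ layerL (buildDict edges) coins.length F) = false := by
            simp only [decide_eq_false_iff_not]
            intro h
            exact hl1 (hiL.1 h)
          have hle : liveB (buildDict edges) (markRound (buildDict edges) coins.length F) i
              ≤ liveB (buildDict edges) F i := by
            rw [hlive', liveB_eq_countP_not]
            have := List.countP_mono_left (l := (buildDict edges).getD i [])
              (p := fun k => !(getB F k) && !(decide (k ∈ layerL (buildDict edges) coins.length F)))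
              (q := fun k => !(getB F k))
              (by intro a _ h; simp only [Bool.and_eq_true] at h; exact h.1)
            omega
          have hnn' := liveB_nonneg (buildDict edges) (markRound (buildDict edges) coins.length F) i
          have hz : ¬ ((0 : Int) < liveB (buildDict edges) (markRound (buildDict edges) coins.length F) i) := by
            omega
          rw [h2, hiL']
          simp [hz]
        · have hl2 : 2 ≤ liveB (buildDict edges) F i := by omega
          have hiL' : decide (i ∈ layerL (buildDict edges) coins.length F) = false := by
            simp only [decide_eq_false_iff_not]
            intro h
            exact hl1 (hiL.1 h)
          have h2 : getB alive2 i = true := by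
            rw [ha2 i h0 h1, hPvi]
            have e1 : (0 : Int) < liveB (buildDict edges) F i := by omega
            have e2 : 2 ≤ dB (buildDict edges) (fun j => getB alive j) i := by omega
            simp [e1, e2]
          have hkey : (dB (buildDict edges) (fun j => getB alive2 j) i : Int)
              = (((buildDict edges).getD i []).countP
                  (fun k => !(getB F k) && !(decide (k ∈ layerL (buildDict edges) coins.length F))) : Int) := by
            unfold dB
            congr 1
            apply List.countP_congr
            intro k hk
            have hkr := ((hg i).2.1 k hk).1
            rw [ha2 k hkr.1 hkr.2]
            cases hFk : getB F k with
            | true =>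
                have : getB alive k = false := by
                  rw [heq k hkr.1 hkr.2]; unfold Pv; simp [hFk]
                simp [this]
            | false =>
                have hlk : 1 ≤ liveB (buildDict edges) F k :=
                  liveB_pos (buildDict edges) F (((hg i).2.2 k).1 hk) hFi
                have halk : getB alive k = true := by
                  rw [heq k hkr.1 hkr.2]; unfold Pv
                  simp [hFk, show (0 : Int) < liveB (buildDict edges) F k by omega]
                have hdk := hda k hkr.1 hkr.2 hFk
                have hkL : k ∈ layerL (buildDict edges) coins.length F ↔
                    liveB (buildDict edges) F k = 1 := by
                  rw [hmemL k]
                  constructor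
                  · intro h; exact h.2.2.2
                  · intro h; exact ⟨hkr.1, hkr.2, hFk, h⟩
                by_cases h1k : liveB (buildDict edges) F k = 1
                · have hno : ¬ (2 ≤ dB (buildDict edges) (fun j => getB alive j) k) := by omega
                  have hin : decide (k ∈ layerL (buildDict edges) coins.length F) = true := by
                    simp [hkL, h1k]
                  simp [halk, hno, hin]
                · have h2k : 2 ≤ liveB (buildDict edges) F k := by omega
                  have hyes : 2 ≤ dB (buildDict edges) (fun j => getB alive j) k := by omega
                  have hout : decide (k ∈ layerL (buildDict edges) coins.length F) = false := by
                    simp only [decide_eq_false_iff_not]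
                    intro h
                    exact h1k (hkL.1 h)
                  simp [halk, hyes, hout]
          have hdec : decide (1 ≤ dB (buildDict edges) (fun j => getB alive2 j) i)
              = decide ((0 : Int) < liveB (buildDict edges) (markRound (buildDict edges) coins.length F) i) := by
            rw [hlive']
            simp only [decide_eq_decide]
            omega
          rw [h2, hiL', hdec]
          simp

theorem length_bRound (coins : List Int) (edges : List (List Int)) (alive : List Bool) :
    (bRound coins edges alive).length = coins.length := by
  unfold bRound
  exact length_mapRange _ _

theorem length_pyRange_nat_succ (n : Nat) :
    (PySem.List.pyRange 0 ((n : Int) + 1) 1).length = n + 1 := by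
  rw [PySem.List.length_pyRange_one]
  omega

theorem countP_not_replicate_false (n : Nat) :
    (List.replicate n false).countP (fun b => !b) = n := by
  induction n with
  | zero => rfl
  | succ n ih => simp [List.replicate_succ, List.countP_cons, ih]

theorem main_equiv (coins : List Int) (edges : List (List Int))
    (hPre : Pre_collectTheCoins coins edges) :
    collectTheCoins coins edges = collectTheCoins_alt coins edges := by
  have hg : GraphOK coins.length (buildDict edges) := graphOK_buildDict hPre
  have hInv0 := cnt0_CInv hPre
  -- the stabilized phase-1 set computed by port B
  set g := buildDict edges with hgdef
  set n := coins.length with hndef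
  set Sx := (bStep coins edges)^[n + 1] (List.replicate n true) with hSx
  have hfix : bStep coins edges Sx = Sx := alive1_fix coins edges
  have hSlen : Sx.length = n := by
    rw [hndef]
    exact length_iter_bStep coins edges (n + 1) _ (by simpa using hndef)
  -- fixpoint facts about Sx
  have hp : ∀ i : Int, 0 ≤ i → i < (n : Int) → (fun j => getB Sx j) i = true →
      1 ≤ dB g (fun j => getB Sx j) i ∧
      (getI coins i = 0 → 2 ≤ dB g (fun j => getB Sx j) i) := by
    intro i h0 h1 hSi
    have hread := getB_bStep hPre.1 Sx i h0 h1
    rw [hfix] at hread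
    simp only at hSi
    rw [hSi] at hread
    have hread' := hread.symm
    simp only [Bool.and_eq_true, Bool.or_eq_true, decide_eq_true_eq, Bool.not_eq_true',
      beq_iff_eq] at hread'
    refine ⟨hread'.1.2, ?_⟩
    intro hc
    rcases hread'.2 with h | h
    · exfalso
      rw [hc] at h
      simp at h
    · exact h
  -- initial state of the peel
  rw [a_unfold]
  have hq0eq := q0_eq hInv0
  have hq0 := QOK0 hInv0
  rw [hq0eq] at hq0
  rw [hq0eq]
  have hqc0 : ∀ x ∈ (PySem.List.pyRange 0 n 1).filter
      (fun i => getI coins i == 0 && liveB g (List.replicate n false) i == 1),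
      getI coins x = 0 := by
    intro x hx
    have := (List.mem_filter.1 hx).2
    simp only [Bool.and_eq_true, beq_iff_eq] at this
    exact this.1
  have hcompl0 : ∀ i : Int, 0 ≤ i → i < (n : Int) →
      getB (List.replicate n false) i = false → getI coins i = 0 →
      liveB g (List.replicate n false) i = 1 →
      i ∈ (PySem.List.pyRange 0 n 1).filter
        (fun i => getI coins i == 0 && liveB g (List.replicate n false) i == 1) := by
    intro i h0 h1 _ hc hl
    refine List.mem_filter.2 ⟨PySem.List.mem_pyRange_one.2 ⟨h0, h1⟩, ?_⟩
    simp [hc, hl]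
  have hdF0 : ∀ i : Int, 0 ≤ i → i < (n : Int) → (fun j => getB Sx j) i = true →
      getB (List.replicate n false) i = false := by
    intro i _ _ _
    exact getB_replicate_false n i
  have hdq0 : ∀ x ∈ (PySem.List.pyRange 0 n 1).filter
      (fun i => getI coins i == 0 && liveB g (List.replicate n false) i == 1),
      (fun j => getB Sx j) x = false := by
    intro x hx
    have hr := PySem.List.mem_pyRange_one.1 (List.mem_filter.1 hx).1
    have hcond := (List.mem_filter.1 hx).2
    simp only [Bool.and_eq_true, beq_iff_eq] at hcond
    show getB Sx x = false
    cases hpx : getB Sx x with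
    | false => rfl
    | true =>
        exfalso
        have h2d := (hp x hr.1 hr.2 hpx).2 hcond.1
        have hge : (dB g (fun j => getB Sx j) x : Int) ≤ liveB g (List.replicate n false) x :=
          liveB_ge_dB _ _ x (fun k _ _ => getB_replicate_false n k)
        omega
  have hphi0 : 2 * (((List.replicate n false).countP (fun b => !b) : Int))
      - ((PySem.List.pyRange 0 n 1).filter
          (fun i => getI coins i == 0 && liveB g (List.replicate n false) i == 1)).length
      ≤ ((2 * n + 1 : Nat) : Int) := by
    rw [countP_not_replicate_false]
    push_cast
    omega
  obtain ⟨hInv1, hnl1, hprot1⟩ := loop_sim2 hg coins (fun j => getB Sx j) hp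
    (2 * n + 1) _ _ _ hInv0 hq0 hqc0 hcompl0 hdF0 hdq0 hphi0
  set F1 := seqLoop g coins (2 * n + 1) (List.replicate n false)
    ((PySem.List.pyRange 0 n 1).filter
      (fun i => getI coins i == 0 && liveB g (List.replicate n false) i == 1)) with hF1def
  have hF1len : F1.length = n := hInv1.2.1
  -- pointwise: Sx = the positive set of the drained flags
  have hpt1 : ∀ i : Int, 0 ≤ i → i < (n : Int) → getB Sx i = Pv g F1 i := by
    intro i h0 h1
    cases hPv : Pv g F1 i with
    | true => exact P1_le_iter hPre.1 hg F1 hnl1 (n + 1) i h0 h1 hPv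
    | false =>
        cases hSi : getB Sx i with
        | false => rfl
        | true =>
            exfalso
            have hF1i : getB F1 i = false := hprot1 i h0 h1 hSi
            have hge : (dB g (fun j => getB Sx j) i : Int) ≤ liveB g F1 i :=
              liveB_ge_dB _ _ i
                (fun k hk hpk => hprot1 k ((hg i).2.1 k hk).1.1 ((hg i).2.1 k hk).1.2 hpk)
            have h1d := (hp i h0 h1 hSi).1
            have : Pv g F1 i = true := by
              unfold Pv
              simp only [hF1i, Bool.not_false, Bool.true_and, decide_eq_true_eq]
              omega
            rw [this] at hPv
            exact absurd hPv (by simp)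
  -- the two rounds, on both sides
  have hpt2 := round_pointwise hPre.1 hg F1 Sx hF1len hpt1
  have hF2len : (markRound g n F1).length = n := by rw [length_markRound, hF1len]
  have hpt3 := round_pointwise hPre.1 hg (markRound g n F1) (bRound coins edges Sx) hF2len hpt2
  have hInv2 := round_sim hg hInv1
  have hInv3 := round_sim hg hInv2
  -- assemble
  have h01 : PySem.List.pyRange 0 2 1 = [0, 1] := by decide
  rw [h01]
  simp only [List.foldl_cons, List.foldl_nil]
  have hBside : collectTheCoins_alt coins edges
      = max (2 * (((bRound coins edges (bRound coins edges Sx)).countP (fun b => b) : Int) - 1)) 0 := by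
    simp only [collectTheCoins_alt]
    rw [h01]
    rw [foldl_const_iterate (bStep coins edges) _ (List.replicate coins.length true)]
    rw [length_pyRange_nat_succ]
    simp only [List.foldl_cons, List.foldl_nil]
    rw [hSx]
  rw [hBside]
  exact final_eq hInv3 (bRound coins edges (bRound coins edges Sx))
    (by rw [length_bRound]) hpt3

-- ===== VERDICT (by name: the statement is the Claim_ definition above) =====
theorem collectTheCoins_spec : Claim_equal_collectTheCoins := by
  intro coins edges _ hPre
  exact main_equiv coins edges hPre
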